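-- pv_equiv track=rewrite | github.com/thegautam/arc-agi-benchmarking | src/arc_agi_benchmarking/prompts/scene_builder.py | get_largest_bounding_box
-- ===== SOURCE A (Python) =====
-- from typing import List, Dict, Tuple
-- from collections import deque
--
-- def get_largest_bounding_box(
--     grid: List[List[int]],
--     blank_hops: int = 0,
-- ) -> Dict[int, List[Tuple[int, int, int, int]]]:
--     """
--     For each non-zero color, find components consisting of that color and return
--     their bounding boxes. Connectivity is primarily 4-directional (up, down, left, right)
--     through same-color cells, but can optionally traverse up to `blank_hops` consecutive
--     blank (zero) cells in order to connect same-color regions.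
--
--     Returns:
--         Dict[color, List[(top, left, bottom, right)]]
--
--     Notes:
--     - Connectivity is 4-directional (up, down, left, right).
--     - When `blank_hops` > 0, traversal may pass through up to that many consecutive 0-cells
--       (blank spaces). Traversal cannot pass through non-zero cells of a different color.
--       The consecutive-blank counter resets whenever a same-color cell is reached.
--     - Coordinates are 0-indexed and inclusive.
--     - Lists of boxes are sorted lexicographically for determinism.
--     - Returns an empty dict if the grid is empty or contains no non-zero cells.
--     """
--     if not grid or not grid[0]:
--         return {}
--
--     rows, cols = len(grid), len(grid[0])
--     # Clamp negative values to 0 to preserve expected behavior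
--     blank_hops = max(0, int(blank_hops))
--
--     # Tracks which cells of a given color have already been assigned to any component
--     visited_color = [[False] * cols for _ in range(rows)]
--     boxes_by_color: Dict[int, List[Tuple[int, int, int, int]]] = {}
--
--     for r in range(rows):
--         for c in range(cols):
--             color = grid[r][c]
--             if color == 0 or visited_color[r][c]:
--                 continue
--
--             # BFS for the current component, allowing up to `blank_hops` consecutive blanks (0s)
--             queue = deque()
--             queue.append((r, c, 0))  # (row, col, consecutive_blank_count)
--             visited_color[r][c] = True
--             top = bottom = r
--             left = right = c
--
--             # Track best (lowest) consecutive-blank count we've seen for zero cells in this BFS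
--             visited_zero: List[List[int | None]] = [[None] * cols for _ in range(rows)]
--
--             while queue:
--                 cr, cc, consec = queue.popleft()
--
--                 # Update bounding box whenever we visit a same-color cell
--                 if grid[cr][cc] == color:
--                     if cr < top:
--                         top = cr
--                     if cr > bottom:
--                         bottom = cr
--                     if cc < left:
--                         left = cc
--                     if cc > right:
--                         right = cc
--
--                 for dr, dc in ((-1, 0), (1, 0), (0, -1), (0, 1)):
--                     nr, nc = cr + dr, cc + dc
--                     if not (0 <= nr < rows and 0 <= nc < cols):
--                         continue
--
--                     cell = grid[nr][nc]
--                     if cell == color: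
--                         if not visited_color[nr][nc]:
--                             visited_color[nr][nc] = True
--                             queue.append((nr, nc, 0))  # reset consecutive blanks on reaching color
--                     elif cell == 0:
--                         new_consec = consec + 1
--                         if new_consec <= blank_hops:
--                             vz = visited_zero[nr][nc]
--                             if vz is None or new_consec < vz:
--                                 visited_zero[nr][nc] = new_consec
--                                 queue.append((nr, nc, new_consec))
--                     else:
--                         # Different non-zero color: cannot traverse
--                         continue
--
--             boxes_by_color.setdefault(color, []).append((top, left, bottom, right))
--
--     # Sort each color's boxes for determinism
--     for color in boxes_by_color:
--         boxes_by_color[color].sort()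
--
--     return boxes_by_color
-- ===== SOURCE B (Python) =====
-- def get_largest_bounding_box(grid, blank_hops=0):
--     """Same result as A, but each component is found by round-based relaxation of a
--     reachability table (Bellman-Ford-style, iterated to a fixpoint) instead of a BFS
--     queue, and its bounding box is read off the final table afterwards."""
--     if not grid or not grid[0]:
--         return {}
--     rows, cols = len(grid), len(grid[0])
--     hops = max(0, int(blank_hops))
--     seen = set()
--     boxes = {}
--     for r in range(rows):
--         for c in range(cols):
--             color = grid[r][c]
--             if color == 0 or (r, c) in seen:
--                 continue
--             # best[cell] = fewest consecutive blanks needed to stand on it (0 on color cells)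
--             best = {(r, c): 0}
--             changed = True
--             while changed:
--                 changed = False
--                 for (cr, cc), consec in list(best.items()):
--                     for nr, nc in ((cr - 1, cc), (cr + 1, cc), (cr, cc - 1), (cr, cc + 1)):
--                         if 0 <= nr < rows and 0 <= nc < cols:
--                             cell = grid[nr][nc]
--                             if cell == color:
--                                 nv = 0
--                             elif cell == 0 and consec < hops:
--                                 nv = consec + 1
--                             else:
--                                 continue
--                             old = best.get((nr, nc))
--                             if old is None or nv < old:
--                                 best[(nr, nc)] = nv
--                                 changed = True
--             comp = [p for p in best if grid[p[0]][p[1]] == color]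
--             seen.update(comp)
--             rs = [p[0] for p in comp]
--             cs = [p[1] for p in comp]
--             boxes.setdefault(color, []).append((min(rs), min(cs), max(rs), max(cs)))
--     return {col: sorted(bs) for col, bs in boxes.items()}
-- ===== Notes on version B (the rewrite author's own statement) =====
-- stated objective: alternative
-- what changed: Each component is now found by round-based Bellman-Ford-style relaxation of a cell->fewest-consecutive-blanks table iterated to a fixpoint (no queue, no per-component visited grids), and its bounding box is read off the final table afterwards, instead of A's BFS worklist that updates the box while popping.
import Mathlib
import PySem

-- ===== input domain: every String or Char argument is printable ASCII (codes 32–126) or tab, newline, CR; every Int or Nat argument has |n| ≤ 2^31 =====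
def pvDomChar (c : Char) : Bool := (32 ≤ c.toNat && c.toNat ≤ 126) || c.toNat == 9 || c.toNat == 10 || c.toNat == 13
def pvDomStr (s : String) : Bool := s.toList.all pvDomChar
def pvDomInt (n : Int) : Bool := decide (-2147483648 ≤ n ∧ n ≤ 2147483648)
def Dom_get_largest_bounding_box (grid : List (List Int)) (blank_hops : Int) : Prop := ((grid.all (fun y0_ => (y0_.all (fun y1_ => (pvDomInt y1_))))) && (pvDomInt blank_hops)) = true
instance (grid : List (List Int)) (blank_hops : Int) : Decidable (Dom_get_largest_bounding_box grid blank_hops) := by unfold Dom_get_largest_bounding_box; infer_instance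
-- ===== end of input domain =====

-- B finds each component by round-based relaxation of a cell->fewest-consecutive-blanks
-- table iterated to a fixpoint (no BFS queue, no per-component visited grids) and reads
-- the bounding box off the final table (objective: alternative algorithm, same values).

-- shared small helpers (both Pythons read grid[r][c] and call sorted() on box tuples)
def pvCell (grid : List (List Int)) (r c : Int) : Int :=
  PySem.List.pyGetD (PySem.List.pyGetD grid r []) c 0   -- grid[r][c]; exact when in range (Pre_)

-- Python's tuple '<' on (Int,Int,Int,Int), written out (PySem has no 4-tuple order)
def pvBoxLt (a b : Int × Int × Int × Int) : Bool :=
  if a.1 ≠ b.1 then decide (a.1 < b.1)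
  else if a.2.1 ≠ b.2.1 then decide (a.2.1 < b.2.1)
  else if a.2.2.1 ≠ b.2.2.1 then decide (a.2.2.1 < b.2.2.1)
  else decide (a.2.2.2 < b.2.2.2)

-- sorted(xs) on box tuples: same insertion-sort shape as PySem.List.sorted, with the
-- lexicographic comparator above (exact: Python list sort is stable w.r.t. strict '<')
def pvSortBoxes (xs : List (Int × Int × Int × Int)) : List (Int × Int × Int × Int) :=
  xs.foldl (fun acc x => PySem.List.insertBy pvBoxLt x acc) []

-- ===== PORT A =====
-- visited_color[r][c] / visited_zero[r][c] reads and writes on the nested lists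
def pvGet2 {α : Type} (m : List (List α)) (r c : Int) (d : α) : α :=
  PySem.List.pyGetD (PySem.List.pyGetD m r []) c d
def pvSet2 {α : Type} (m : List (List α)) (r c : Int) (v : α) : List (List α) :=
  PySem.List.pySetD m r (PySem.List.pySetD (PySem.List.pyGetD m r []) c v)

-- body of A's 'for dr, dc in ((-1,0),(1,0),(0,-1),(0,1))' loop; state = (queue, visited_color, visited_zero)
def pvStepA (grid : List (List Int)) (rows cols hops color cr cc consec : Int)
    (s : List (Int × Int × Int) × List (List Bool) × List (List (Option Int)))
    (d : Int × Int) :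
    List (Int × Int × Int) × List (List Bool) × List (List (Option Int)) :=
  let nr := cr + d.1
  let nc := cc + d.2
  if 0 ≤ nr ∧ nr < rows ∧ 0 ≤ nc ∧ nc < cols then
    let cell := pvCell grid nr nc
    if cell = color then
      if pvGet2 s.2.1 nr nc false = false then
        (s.1 ++ [(nr, nc, (0 : Int))], pvSet2 s.2.1 nr nc true, s.2.2)
      else s
    else if cell = 0 then
      let newConsec := consec + 1
      if newConsec ≤ hops then
        match pvGet2 s.2.2 nr nc none with
        | none => (s.1 ++ [(nr, nc, newConsec)], s.2.1, pvSet2 s.2.2 nr nc (some newConsec))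
        | some vz =>
          if newConsec < vz then
            (s.1 ++ [(nr, nc, newConsec)], s.2.1, pvSet2 s.2.2 nr nc (some newConsec))
          else s
      else s
    else s
  else s

-- A's 'while queue' BFS (fuel is a Lean totality artifact, generous in the mains)
def pvBfsA (grid : List (List Int)) (rows cols hops color : Int) :
    Nat → List (Int × Int × Int) → List (List Bool) → List (List (Option Int)) →
    Int → Int → Int → Int → List (List Bool) × (Int × Int × Int × Int)
  | 0, _, vc, _, top, left, bottom, right => (vc, (top, left, bottom, right))
  | _ + 1, [], vc, _, top, left, bottom, right => (vc, (top, left, bottom, right))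
  | fuel + 1, (cr, cc, consec) :: q, vc, vz, top, left, bottom, right =>
    let top' := if pvCell grid cr cc = color then (if cr < top then cr else top) else top
    let bottom' := if pvCell grid cr cc = color then (if bottom < cr then cr else bottom) else bottom
    let left' := if pvCell grid cr cc = color then (if cc < left then cc else left) else left
    let right' := if pvCell grid cr cc = color then (if right < cc then cc else right) else right
    let s := [((-1 : Int), (0 : Int)), (1, 0), (0, -1), (0, 1)].foldl
        (pvStepA grid rows cols hops color cr cc consec) (q, vc, vz)
    pvBfsA grid rows cols hops color fuel s.1 s.2.1 s.2.2 top' left' bottom' right'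

def get_largest_bounding_box (grid : List (List Int)) (blank_hops : Int) :
    List (Int × List (Int × Int × Int × Int)) :=
  match grid with
  | [] => []
  | g0 :: _ =>
    if g0 = [] then []
    else
      let rows : Int := PySem.List.len grid
      let cols : Int := PySem.List.len (PySem.List.pyGetD grid 0 [])
      let hops : Int := max 0 blank_hops
      let vc0 : List (List Bool) := List.replicate rows.toNat (List.replicate cols.toNat false)
      let final := (PySem.List.pyRange 0 rows 1).foldl (fun st r =>
        (PySem.List.pyRange 0 cols 1).foldl (fun st c =>
          let color := pvCell grid r c
          if color = 0 ∨ pvGet2 st.1 r c false = true then st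
          else
            let fuel := rows.toNat * cols.toNat * (hops.toNat + 2) + 2
            let vz0 : List (List (Option Int)) :=
              List.replicate rows.toNat (List.replicate cols.toNat (none : Option Int))
            let res := pvBfsA grid rows cols hops color fuel [(r, c, 0)]
                (pvSet2 st.1 r c true) vz0 r c r c
            (res.1, st.2.modify color [] (fun l => l ++ [res.2]))) st)
        ((vc0, (PySem.Dict.empty : PySem.Dict Int (List (Int × Int × Int × Int)))))
      -- 'for color in boxes_by_color: boxes_by_color[color].sort()'
      (final.2.keys.foldl (fun d k => d.modify k [] (fun l => pvSortBoxes l)) final.2).items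

-- ===== PORT B =====
-- body of B's innermost loop: relax one neighbour n from a snapshot pair (cell, consec);
-- state = (best, changed)
def pvRelax (grid : List (List Int)) (rows cols hops color consec : Int)
    (s : PySem.Dict (Int × Int) Int × Bool) (n : Int × Int) :
    PySem.Dict (Int × Int) Int × Bool :=
  if 0 ≤ n.1 ∧ n.1 < rows ∧ 0 ≤ n.2 ∧ n.2 < cols then
    let cell := pvCell grid n.1 n.2
    let nv? : Option Int :=
      if cell = color then some 0
      else if cell = 0 ∧ consec < hops then some (consec + 1)
      else none
    match nv? with
    | none => s
    | some nv =>
      match s.1.get? n with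
      | none => (s.1.insert n nv, true)
      | some old => if nv < old then (s.1.insert n nv, true) else s
  else s

-- one 'for (cr, cc), consec in list(best.items())' pass; returns (best, changed)
def pvPass (grid : List (List Int)) (rows cols hops color : Int)
    (bb : PySem.Dict (Int × Int) Int) : PySem.Dict (Int × Int) Int × Bool :=
  bb.items.foldl (fun s pv =>
    [(pv.1.1 - 1, pv.1.2), (pv.1.1 + 1, pv.1.2), (pv.1.1, pv.1.2 - 1), (pv.1.1, pv.1.2 + 1)].foldl
      (pvRelax grid rows cols hops color pv.2) s) (bb, false)

-- B's 'while changed' loop (fuel is a Lean totality artifact, generous in the main)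
def pvDpLoop (grid : List (List Int)) (rows cols hops color : Int) :
    Nat → PySem.Dict (Int × Int) Int → PySem.Dict (Int × Int) Int
  | 0, bb => bb
  | fuel + 1, bb =>
    let s := pvPass grid rows cols hops color bb
    if s.2 then pvDpLoop grid rows cols hops color fuel s.1 else s.1

def get_largest_bounding_box_alt (grid : List (List Int)) (blank_hops : Int) :
    List (Int × List (Int × Int × Int × Int)) :=
  match grid with
  | [] => []
  | g0 :: _ =>
    if g0 = [] then []
    else
      let rows : Int := PySem.List.len grid
      let cols : Int := PySem.List.len (PySem.List.pyGetD grid 0 [])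
      let hops : Int := max 0 blank_hops
      let final := (PySem.List.pyRange 0 rows 1).foldl (fun st r =>
        (PySem.List.pyRange 0 cols 1).foldl (fun st c =>
          let color := pvCell grid r c
          if color = 0 ∨ PySem.Set.contains st.1 (r, c) = true then st
          else
            let fuel := (hops.toNat + 2) * (rows.toNat * cols.toNat) + 2
            let best := pvDpLoop grid rows cols hops color fuel
                (PySem.Dict.empty.insert (r, c) 0)
            let comp := best.keys.filter (fun p => pvCell grid p.1 p.2 == color)
            let rs := comp.map (fun p => p.1)
            let cs := comp.map (fun p => p.2)
            -- min(rs) / min(cs) / max(rs) / max(cs): comp contains the seed, so the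
            -- .getD defaults are dead branches
            let box := ((PySem.List.min? rs (fun x => x)).getD 0,
                        (PySem.List.min? cs (fun x => x)).getD 0,
                        (PySem.List.max? rs (fun x => x)).getD 0,
                        (PySem.List.max? cs (fun x => x)).getD 0)
            (PySem.Set.update st.1 comp, st.2.modify color [] (fun l => l ++ [box]))) st)
        (((PySem.Set.empty : PySem.Set (Int × Int)),
          (PySem.Dict.empty : PySem.Dict Int (List (Int × Int × Int × Int)))))
      -- '{col: sorted(bs) for col, bs in boxes.items()}'
      (PySem.Dict.ofList (final.2.items.map (fun p => (p.1, pvSortBoxes p.2)))).items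

-- ===== PRECONDITION & SPEC =====
-- Pre_ excludes exactly the ragged grids on which A raises IndexError (a row shorter
-- than row 0 is indexed during the scan); it admits every input A returns on.
def Pre_get_largest_bounding_box (grid : List (List Int)) (blank_hops : Int) : Prop :=
  ∀ row ∈ grid, (PySem.List.pyGetD grid 0 []).length ≤ row.length
instance (grid : List (List Int)) (blank_hops : Int) : Decidable (Pre_get_largest_bounding_box grid blank_hops) := by unfold Pre_get_largest_bounding_box; infer_instance

def pvWitness_get_largest_bounding_box : List (List Int) × Int := ([[1, 0, 1], [0, 2, 0]], 1)

def Spec_get_largest_bounding_box (grid : List (List Int)) (blank_hops : Int) (out : List (Int × List (Int × Int × Int × Int))) : Prop := out = get_largest_bounding_box_alt grid blank_hops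
instance (grid : List (List Int)) (blank_hops : Int) (out : List (Int × List (Int × Int × Int × Int))) : Decidable (Spec_get_largest_bounding_box grid blank_hops out) := by unfold Spec_get_largest_bounding_box; infer_instance

-- ===== CLAIM (what is proved, stated in full; the proofs are below) =====
def Claim_equal_get_largest_bounding_box : Prop := ∀ (grid : List (List Int)) (blank_hops : Int), Dom_get_largest_bounding_box grid blank_hops → Pre_get_largest_bounding_box grid blank_hops → Spec_get_largest_bounding_box grid blank_hops (get_largest_bounding_box grid blank_hops)

-- ===== LEMMAS AND PROOFS =====

-- ---------- Layer 1: A's grid-array BFS ≡ a ghost set/dict BFS (lockstep) ----------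

-- ghost: the same BFS with a shared seen-set and a per-component dict (proof device)
def pvStepG (grid : List (List Int)) (rows cols hops color consec : Int)
    (s : List (Int × Int × Int) × PySem.Set (Int × Int) × PySem.Dict (Int × Int) Int)
    (n : Int × Int) :
    List (Int × Int × Int) × PySem.Set (Int × Int) × PySem.Dict (Int × Int) Int :=
  let nr := n.1
  let nc := n.2
  if 0 ≤ nr ∧ nr < rows ∧ 0 ≤ nc ∧ nc < cols then
    let cell := pvCell grid nr nc
    if cell = color then
      if PySem.Set.contains s.2.1 (nr, nc) = false then
        (s.1 ++ [(nr, nc, (0 : Int))], PySem.Set.add s.2.1 (nr, nc), s.2.2)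
      else s
    else if cell = 0 ∧ consec < hops then
      match s.2.2.get? (nr, nc) with
      | none => (s.1 ++ [(nr, nc, consec + 1)], s.2.1, s.2.2.insert (nr, nc) (consec + 1))
      | some best =>
        if consec + 1 < best then
          (s.1 ++ [(nr, nc, consec + 1)], s.2.1, s.2.2.insert (nr, nc) (consec + 1))
        else s
    else s
  else s

def pvBfsG (grid : List (List Int)) (rows cols hops color : Int) :
    Nat → List (Int × Int × Int) → PySem.Set (Int × Int) → PySem.Dict (Int × Int) Int →
    Int → Int → Int → Int → PySem.Set (Int × Int) × (Int × Int × Int × Int)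
  | 0, _, seen, _, top, left, bottom, right => (seen, (top, left, bottom, right))
  | _ + 1, [], seen, _, top, left, bottom, right => (seen, (top, left, bottom, right))
  | fuel + 1, (cr, cc, consec) :: q, seen, bb, top, left, bottom, right =>
    let top' := if pvCell grid cr cc = color then min top cr else top
    let bottom' := if pvCell grid cr cc = color then max bottom cr else bottom
    let left' := if pvCell grid cr cc = color then min left cc else left
    let right' := if pvCell grid cr cc = color then max right cc else right
    let s := [(cr - 1, cc), (cr + 1, cc), (cr, cc - 1), (cr, cc + 1)].foldl
        (pvStepG grid rows cols hops color consec) (q, seen, bb)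
    pvBfsG grid rows cols hops color fuel s.1 s.2.1 s.2.2 top' left' bottom' right'

def pvGhostMain (grid : List (List Int)) (blank_hops : Int) :
    List (Int × List (Int × Int × Int × Int)) :=
  match grid with
  | [] => []
  | g0 :: _ =>
    if g0 = [] then []
    else
      let rows : Int := PySem.List.len grid
      let cols : Int := PySem.List.len (PySem.List.pyGetD grid 0 [])
      let hops : Int := max 0 blank_hops
      let final := (PySem.List.pyRange 0 rows 1).foldl (fun st r =>
        (PySem.List.pyRange 0 cols 1).foldl (fun st c =>
          let color := pvCell grid r c
          if color = 0 ∨ PySem.Set.contains st.1 (r, c) = true then st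
          else
            let fuel := rows.toNat * cols.toNat * (hops.toNat + 2) + 2
            let res := pvBfsG grid rows cols hops color fuel [(r, c, 0)]
                (PySem.Set.add st.1 (r, c)) PySem.Dict.empty r c r c
            (res.1, st.2.modify color [] (fun l => l ++ [res.2]))) st)
        (((PySem.Set.empty : PySem.Set (Int × Int)),
          (PySem.Dict.empty : PySem.Dict Int (List (Int × Int × Int × Int)))))
      (PySem.Dict.ofList (final.2.items.map (fun p => (p.1, pvSortBoxes p.2)))).items

-- rectangular shape of A's visited grids
def PvShape {α : Type} (rows cols : Int) (m : List (List α)) : Prop :=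
  m.length = rows.toNat ∧ ∀ i (h : i < m.length), m[i].length = cols.toNat

-- the two simulation invariants: A's grids and the ghost's set/dict agree on all in-range cells
def PvInvC (rows cols : Int) (vc : List (List Bool)) (seen : PySem.Set (Int × Int)) : Prop :=
  PvShape rows cols vc ∧
  ∀ r c : Int, 0 ≤ r → r < rows → 0 ≤ c → c < cols →
    pvGet2 vc r c false = PySem.Set.contains seen (r, c)

def PvInvZ (rows cols : Int) (vz : List (List (Option Int))) (bb : PySem.Dict (Int × Int) Int) : Prop :=
  PvShape rows cols vz ∧
  ∀ r c : Int, 0 ≤ r → r < rows → 0 ≤ c → c < cols →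
    pvGet2 vz r c none = bb.get? (r, c)

theorem pvShape_set2 {α : Type} {rows cols : Int} {m : List (List α)} (hs : PvShape rows cols m)
    {r c : Int} (hr0 : 0 ≤ r) (hr1 : r < rows) (hc0 : 0 ≤ c) (v : α) :
    PvShape rows cols (pvSet2 m r c v) := by
  obtain ⟨hlen, hrow⟩ := hs
  unfold pvSet2
  rw [PySem.List.pySetD_of_nonneg _ _ hr0]
  refine ⟨by simpa using hlen, ?_⟩
  intro i h
  rw [List.getElem_set]
  split
  · next heq =>
    rw [PySem.List.length_pySetD]
    rw [PySem.List.pyGetD_eq_getElem _ _ hr0 (by rw [hlen]; omega)]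
    exact hrow r.toNat (by rw [hlen]; omega)
  · exact hrow i (by simpa using h)

theorem pvGet2_set2 {α : Type} {rows cols : Int} {m : List (List α)} (hs : PvShape rows cols m)
    {r c : Int} (hr0 : 0 ≤ r) (hr1 : r < rows) (hc0 : 0 ≤ c) (hc1 : c < cols) (v d : α)
    (r' c' : Int) (hr0' : 0 ≤ r') (hr1' : r' < rows) (hc0' : 0 ≤ c') (hc1' : c' < cols) :
    pvGet2 (pvSet2 m r c v) r' c' d = if r' = r ∧ c' = c then v else pvGet2 m r' c' d := by
  obtain ⟨hlen, hrow⟩ := hs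
  have hrN : r.toNat < m.length := by omega
  have hrN' : r'.toNat < m.length := by omega
  have hrowr : m[r.toNat].length = cols.toNat := hrow _ hrN
  have hrowr' : m[r'.toNat].length = cols.toNat := hrow _ hrN'
  have hgr : PySem.List.pyGetD m r ([] : List α) = m[r.toNat] :=
    PySem.List.pyGetD_eq_getElem _ _ hr0 (by omega)
  unfold pvGet2 pvSet2
  rw [PySem.List.pySetD_of_nonneg _ _ hr0, PySem.List.pySetD_of_nonneg _ _ hc0, hgr]
  rw [PySem.List.pyGetD_eq_getElem (m.set r.toNat (m[r.toNat].set c.toNat v)) _ hr0'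
    (by simp only [List.length_set]; omega)]
  rw [List.getElem_set]
  by_cases hre : r' = r
  · subst hre
    rw [if_pos rfl]
    rw [PySem.List.pyGetD_eq_getElem _ _ hc0' (by simp only [List.length_set, hrowr]; omega)]
    rw [List.getElem_set]
    by_cases hce : c' = c
    · subst hce
      rw [if_pos rfl, if_pos ⟨rfl, rfl⟩]
    · rw [if_neg (by omega : ¬ c.toNat = c'.toNat), if_neg (fun hco => hce hco.2)]
      rw [PySem.List.pyGetD_eq_getElem m _ hr0' (by omega),
        PySem.List.pyGetD_eq_getElem _ _ hc0' (by rw [hrowr']; omega)]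
  · rw [if_neg (by omega : ¬ r.toNat = r'.toNat), if_neg (fun hco => hre hco.1)]
    rw [PySem.List.pyGetD_eq_getElem m _ hr0' (by omega)]

theorem pvContains_add {s : PySem.Set (Int × Int)} {x y : Int × Int} :
    PySem.Set.contains (PySem.Set.add s x) y = (PySem.Set.contains s y || decide (y = x)) := by
  rw [Bool.eq_iff_iff]
  simp [PySem.Set.mem_add]

-- marking a color cell preserves the first invariant
theorem pvInvC_mark {rows cols : Int} {vc seen} (h : PvInvC rows cols vc seen)
    {r c : Int} (hr0 : 0 ≤ r) (hr1 : r < rows) (hc0 : 0 ≤ c) (hc1 : c < cols) :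
    PvInvC rows cols (pvSet2 vc r c true) (PySem.Set.add seen (r, c)) := by
  refine ⟨pvShape_set2 h.1 hr0 hr1 hc0 true, ?_⟩
  intro r' c' hr0' hr1' hc0' hc1'
  rw [pvGet2_set2 h.1 hr0 hr1 hc0 hc1 true false r' c' hr0' hr1' hc0' hc1',
    pvContains_add, ← h.2 r' c' hr0' hr1' hc0' hc1']
  by_cases he : r' = r ∧ c' = c
  · rw [if_pos he]
    have : ((r', c') : Int × Int) = (r, c) := by simp [Prod.ext_iff]; tauto
    simp [this]
  · rw [if_neg he]
    have : ¬ (((r', c') : Int × Int) = (r, c)) := by simp [Prod.ext_iff]; tauto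
    simp [this]

-- recording a blank cell preserves the second invariant
theorem pvInvZ_set {rows cols : Int} {vz bb} (h : PvInvZ rows cols vz bb)
    {r c : Int} (hr0 : 0 ≤ r) (hr1 : r < rows) (hc0 : 0 ≤ c) (hc1 : c < cols) (k : Int) :
    PvInvZ rows cols (pvSet2 vz r c (some k)) (bb.insert (r, c) k) := by
  refine ⟨pvShape_set2 h.1 hr0 hr1 hc0 (some k), ?_⟩
  intro r' c' hr0' hr1' hc0' hc1'
  rw [pvGet2_set2 h.1 hr0 hr1 hc0 hc1 (some k) none r' c' hr0' hr1' hc0' hc1',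
    PySem.Dict.get?_insert, ← h.2 r' c' hr0' hr1' hc0' hc1']
  by_cases he : r' = r ∧ c' = c
  · rw [if_pos he, if_pos (by simp [Prod.ext_iff]; tauto)]
  · rw [if_neg he, if_neg (by simp [Prod.ext_iff]; tauto)]

-- the relation between A's and the ghost's BFS states
def PvStR (rows cols : Int)
    (sa : List (Int × Int × Int) × List (List Bool) × List (List (Option Int)))
    (sb : List (Int × Int × Int) × PySem.Set (Int × Int) × PySem.Dict (Int × Int) Int) : Prop :=
  sa.1 = sb.1 ∧ PvInvC rows cols sa.2.1 sb.2.1 ∧ PvInvZ rows cols sa.2.2 sb.2.2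

theorem pvStep_rel {grid : List (List Int)} {rows cols hops color cr cc consec : Int}
    (dr dc : Int) (n : Int × Int) (hn1 : n.1 = cr + dr) (hn2 : n.2 = cc + dc)
    {sa sb} (h : PvStR rows cols sa sb) :
    PvStR rows cols (pvStepA grid rows cols hops color cr cc consec sa (dr, dc))
      (pvStepG grid rows cols hops color consec sb n) := by
  obtain ⟨n1, n2⟩ := n
  simp only at hn1 hn2
  subst hn1; subst hn2
  obtain ⟨hq, hC, hZ⟩ := h
  unfold pvStepA pvStepG
  simp only
  by_cases hb : 0 ≤ cr + dr ∧ cr + dr < rows ∧ 0 ≤ cc + dc ∧ cc + dc < cols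
  · rw [if_pos hb, if_pos hb]
    obtain ⟨h1, h2, h3, h4⟩ := hb
    by_cases hcol : pvCell grid (cr + dr) (cc + dc) = color
    · rw [if_pos hcol, if_pos hcol]
      have hvis := hC.2 (cr + dr) (cc + dc) h1 h2 h3 h4
      rw [hvis]
      by_cases hseen : PySem.Set.contains sb.2.1 (cr + dr, cc + dc) = false
      · rw [if_pos hseen, if_pos hseen]
        exact ⟨by rw [hq], pvInvC_mark hC h1 h2 h3 h4, hZ⟩
      · rw [if_neg hseen, if_neg hseen]
        exact ⟨hq, hC, hZ⟩
    · rw [if_neg hcol, if_neg hcol]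
      by_cases hz : pvCell grid (cr + dr) (cc + dc) = 0
      · rw [if_pos hz]
        by_cases hh : consec + 1 ≤ hops
        · rw [if_pos hh, if_pos ⟨hz, by omega⟩]
          have hlook := hZ.2 (cr + dr) (cc + dc) h1 h2 h3 h4
          rw [hlook]
          cases hget : sb.2.2.get? (cr + dr, cc + dc) with
          | none =>
            simp only []
            exact ⟨by rw [hq], hC, pvInvZ_set hZ h1 h2 h3 h4 (consec + 1)⟩
          | some best =>
            simp only []
            by_cases hlt : consec + 1 < best
            · rw [if_pos hlt, if_pos hlt]
              exact ⟨by rw [hq], hC, pvInvZ_set hZ h1 h2 h3 h4 (consec + 1)⟩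
            · rw [if_neg hlt, if_neg hlt]
              exact ⟨hq, hC, hZ⟩
        · rw [if_neg hh, if_neg (by intro hcon; exact hh (by omega))]
          exact ⟨hq, hC, hZ⟩
      · rw [if_neg hz, if_neg (by intro hcon; exact hz hcon.1)]
        exact ⟨hq, hC, hZ⟩
  · rw [if_neg hb, if_neg hb]
    exact ⟨hq, hC, hZ⟩

theorem pvBfs_rel {grid : List (List Int)} {rows cols hops color : Int} :
    ∀ (fuel : Nat) (q : List (Int × Int × Int)) vc vz seen bb (top left bottom right : Int),
    PvInvC rows cols vc seen → PvInvZ rows cols vz bb →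
    (pvBfsA grid rows cols hops color fuel q vc vz top left bottom right).2 =
      (pvBfsG grid rows cols hops color fuel q seen bb top left bottom right).2 ∧
    PvInvC rows cols (pvBfsA grid rows cols hops color fuel q vc vz top left bottom right).1
      (pvBfsG grid rows cols hops color fuel q seen bb top left bottom right).1 := by
  intro fuel
  induction fuel with
  | zero =>
    intro q vc vz seen bb top left bottom right hC hZ
    exact ⟨rfl, hC⟩
  | succ m ih =>
    intro q vc vz seen bb top left bottom right hC hZ
    cases q with
    | nil => exact ⟨rfl, hC⟩
    | cons head q' =>
      obtain ⟨cr, cc, consec⟩ := head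
      have h0 : PvStR rows cols (q', vc, vz) (q', seen, bb) := ⟨rfl, hC, hZ⟩
      have hstep1 := pvStep_rel (grid := grid) (rows := rows) (cols := cols) (hops := hops)
        (color := color) (cr := cr) (cc := cc) (consec := consec)
        (-1) 0 (cr - 1, cc) (by ring) (by ring) h0
      have hstep2 := pvStep_rel (grid := grid) (rows := rows) (cols := cols) (hops := hops)
        (color := color) (cr := cr) (cc := cc) (consec := consec)
        1 0 (cr + 1, cc) (by ring) (by ring) hstep1
      have hstep3 := pvStep_rel (grid := grid) (rows := rows) (cols := cols) (hops := hops)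
        (color := color) (cr := cr) (cc := cc) (consec := consec)
        0 (-1) (cr, cc - 1) (by ring) (by ring) hstep2
      have hstep4 := pvStep_rel (grid := grid) (rows := rows) (cols := cols) (hops := hops)
        (color := color) (cr := cr) (cc := cc) (consec := consec)
        0 1 (cr, cc + 1) (by ring) (by ring) hstep3
      obtain ⟨hq4, hC4, hZ4⟩ := hstep4
      simp only [pvBfsA, pvBfsG, List.foldl]
      rw [show (if cr < top then cr else top) = min top cr by rw [Int.min_def]; split_ifs <;> omega]
      rw [show (if bottom < cr then cr else bottom) = max bottom cr by rw [Int.max_def]; split_ifs <;> omega]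
      rw [show (if cc < left then cc else left) = min left cc by rw [Int.min_def]; split_ifs <;> omega]
      rw [show (if right < cc then cc else right) = max right cc by rw [Int.max_def]; split_ifs <;> omega]
      rw [hq4]
      exact ih _ _ _ _ _ _ _ _ _ hC4 hZ4

-- the initial structures agree
theorem pvInvC_init {rows cols : Int} :
    PvInvC rows cols (List.replicate rows.toNat (List.replicate cols.toNat false))
      PySem.Set.empty := by
  refine ⟨⟨by simp, by intro i h; simp_all⟩, ?_⟩
  intro r c hr0 hr1 hc0 hc1
  unfold pvGet2
  rw [PySem.List.pyGetD_eq_getElem _ _ hr0 (by simp; omega)]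
  rw [List.getElem_replicate]
  rw [PySem.List.pyGetD_eq_getElem _ _ hc0 (by simp; omega)]
  simp [PySem.Set.empty, PySem.Set.contains]

theorem pvInvZ_init {rows cols : Int} :
    PvInvZ rows cols (List.replicate rows.toNat (List.replicate cols.toNat (none : Option Int)))
      PySem.Dict.empty := by
  refine ⟨⟨by simp, by intro i h; simp_all⟩, ?_⟩
  intro r c hr0 hr1 hc0 hc1
  unfold pvGet2
  rw [PySem.List.pyGetD_eq_getElem _ _ hr0 (by simp; omega)]
  rw [List.getElem_replicate]
  rw [PySem.List.pyGetD_eq_getElem _ _ hc0 (by simp; omega)]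
  simp [PySem.Dict.get?_empty]

-- a pointwise-related pair of folds stays related
theorem pvFoldRel {α β γ : Type} (R : β → γ → Prop) (f : β → α → β) (g : γ → α → γ)
    (l : List α) (h : ∀ x ∈ l, ∀ b c, R b c → R (f b x) (g c x)) :
    ∀ b c, R b c → R (l.foldl f b) (l.foldl g c) := by
  induction l with
  | nil => intro b c hbc; exact hbc
  | cons x xs ih =>
    intro b c hbc
    exact ih (fun y hy b' c' => h y (List.mem_cons_of_mem _ hy) b' c')
      (f b x) (g c x) (h x (List.mem_cons_self) b c hbc)

-- the final per-color sorts: A's in-place key loop vs the dict comprehension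
theorem pvFin_aux :
    ∀ (l2 l1 : List (Int × List (Int × Int × Int × Int))),
    ((l1 ++ l2).map Prod.fst).Nodup →
    (l2.map Prod.fst).foldl (fun d k => d.modify k [] (fun l => pvSortBoxes l))
        (PySem.Dict.mk (l1.map (fun p => (p.1, pvSortBoxes p.2)) ++ l2)) =
      PySem.Dict.mk ((l1 ++ l2).map (fun p => (p.1, pvSortBoxes p.2)))
  | [], l1, h => by simp
  | (k, v) :: l2, l1, h => by
    have hnd := h
    rw [List.map_append] at hnd
    obtain ⟨hnd1, hnd2, hdisj⟩ := List.nodup_append.mp hnd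
    rw [List.map_cons] at hnd2
    have hk2 : k ∉ l2.map Prod.fst := (List.nodup_cons.mp hnd2).1
    have hk1 : k ∉ l1.map Prod.fst := fun hmem =>
      hdisj k hmem k (by rw [List.map_cons]; exact List.mem_cons_self) rfl
    have hfind : (PySem.Dict.mk (l1.map (fun p => (p.1, pvSortBoxes p.2)) ++ (k, v) :: l2)).get? k
        = some v := by
      simp only [PySem.Dict.get?, List.find?_append]
      have : (l1.map (fun p => (p.1, pvSortBoxes p.2))).find? (fun p => p.1 == k) = none := by
        rw [List.find?_eq_none]
        intro x hx
        simp only [List.mem_map] at hx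
        obtain ⟨p, hp, rfl⟩ := hx
        simp only [beq_iff_eq]
        intro hc; exact hk1 (by simpa [← hc] using List.mem_map_of_mem (f := Prod.fst) hp)
      rw [this]
      simp
    have hcont : (PySem.Dict.mk (l1.map (fun p => (p.1, pvSortBoxes p.2)) ++ (k, v) :: l2)).contains k = true := by
      rw [PySem.Dict.contains_eq_isSome_get?, hfind]; rfl
    simp only [List.map_cons, List.foldl_cons]
    rw [PySem.Dict.modify, PySem.Dict.getD, hfind]
    simp only [Option.getD_some]
    rw [PySem.Dict.insert, if_pos hcont]
    have hitems : (List.map (fun p => if (p.1 == k) = true then (k, pvSortBoxes v) else p)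
        ((l1.map (fun p => (p.1, pvSortBoxes p.2))) ++ (k, v) :: l2))
        = (l1 ++ [(k, v)]).map (fun p => (p.1, pvSortBoxes p.2)) ++ l2 := by
      rw [List.map_append, List.map_cons]
      have e1 : List.map (fun p => if (p.1 == k) = true then (k, pvSortBoxes v) else p)
          (l1.map (fun p => (p.1, pvSortBoxes p.2))) = l1.map (fun p => (p.1, pvSortBoxes p.2)) := by
        apply List.map_congr_left ?_ |>.trans (List.map_id _)
        intro x hx
        simp only [List.mem_map] at hx
        obtain ⟨p, hp, rfl⟩ := hx
        have : ¬ (p.1 = k) := fun hc => hk1 (hc ▸ List.mem_map_of_mem (f := Prod.fst) hp)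
        simp [this]
      have e2 : List.map (fun p => if (p.1 == k) = true then (k, pvSortBoxes v) else p) l2 = l2 := by
        apply List.map_congr_left ?_ |>.trans (List.map_id _)
        intro x hx
        have : ¬ (x.1 = k) := fun hc => hk2 (hc ▸ List.mem_map_of_mem (f := Prod.fst) hx)
        simp [this]
      simp only [e1, e2, beq_self_eq_true, if_pos, List.map_append, List.map_cons, List.map_nil]
      simp [List.append_assoc]
    rw [hitems]
    have := pvFin_aux l2 (l1 ++ [(k, v)]) (by
      rw [List.append_assoc]; simpa using h)
    rw [this, List.append_assoc]
    simp

theorem pvFinalize_eq (d : PySem.Dict Int (List (Int × Int × Int × Int))) (h : d.keys.Nodup) :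
    (d.keys.foldl (fun d k => d.modify k [] (fun l => pvSortBoxes l)) d).items =
      (PySem.Dict.ofList (d.items.map (fun p => (p.1, pvSortBoxes p.2)))).items := by
  obtain ⟨l⟩ := d
  have hkeys : (PySem.Dict.mk l).keys = l.map Prod.fst := rfl
  have hnd : (l.map Prod.fst).Nodup := by simpa [hkeys] using h
  have hleft := pvFin_aux l [] (by simpa using hnd)
  simp only [List.nil_append, List.map_nil] at hleft
  rw [hkeys, hleft]
  have hins := PySem.Dict.items_foldl_insert_fresh (l.map (fun p => (p.1, pvSortBoxes p.2)))
    Prod.fst Prod.snd PySem.Dict.empty (by intro a _; exact PySem.Dict.contains_empty _)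
    (by simpa [List.map_map, Function.comp_def] using hnd)
  have : PySem.Dict.ofList ((PySem.Dict.mk l).items.map (fun p => (p.1, pvSortBoxes p.2)))
      = PySem.Dict.empty.update (l.map (fun p => (p.1, pvSortBoxes p.2))) := rfl
  rw [this, PySem.Dict.update]
  have hfun : (fun (acc : PySem.Dict Int (List (Int × Int × Int × Int))) (p : Int × List (Int × Int × Int × Int)) => acc.insert p.1 p.2)
      = fun d a => d.insert (Prod.fst a) (Prod.snd a) := rfl
  rw [hfun, hins]
  simp [PySem.Dict.empty, Function.comp_def]

-- the outer double scan A vs ghost, in lockstep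
def PvRel2 (rows cols : Int)
    (sa : List (List Bool) × PySem.Dict Int (List (Int × Int × Int × Int)))
    (sb : PySem.Set (Int × Int) × PySem.Dict Int (List (Int × Int × Int × Int))) : Prop :=
  PvInvC rows cols sa.1 sb.1 ∧ sa.2 = sb.2 ∧ sb.2.keys.Nodup

theorem pvA_eq_ghost (grid : List (List Int)) (blank_hops : Int) :
    get_largest_bounding_box grid blank_hops = pvGhostMain grid blank_hops := by
  cases grid with
  | nil => rfl
  | cons g0 gs =>
    by_cases hg0 : g0 = []
    · simp [get_largest_bounding_box, pvGhostMain, hg0]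
    · simp only [get_largest_bounding_box, pvGhostMain, if_neg hg0]
      set grid := g0 :: gs with hgrid
      set rows : Int := PySem.List.len grid with hrows
      set cols : Int := PySem.List.len (PySem.List.pyGetD grid 0 []) with hcols
      set hops : Int := max 0 blank_hops with hhops
      have hbody : ∀ r ∈ PySem.List.pyRange 0 rows 1, ∀ sa sb, PvRel2 rows cols sa sb →
          PvRel2 rows cols
            ((PySem.List.pyRange 0 cols 1).foldl (fun st c =>
              let color := pvCell grid r c
              if color = 0 ∨ pvGet2 st.1 r c false = true then st
              else
                let fuel := rows.toNat * cols.toNat * (hops.toNat + 2) + 2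
                let vz0 : List (List (Option Int)) :=
                  List.replicate rows.toNat (List.replicate cols.toNat (none : Option Int))
                let res := pvBfsA grid rows cols hops color fuel [(r, c, 0)]
                    (pvSet2 st.1 r c true) vz0 r c r c
                (res.1, st.2.modify color [] (fun l => l ++ [res.2]))) sa)
            ((PySem.List.pyRange 0 cols 1).foldl (fun st c =>
              let color := pvCell grid r c
              if color = 0 ∨ PySem.Set.contains st.1 (r, c) = true then st
              else
                let fuel := rows.toNat * cols.toNat * (hops.toNat + 2) + 2
                let res := pvBfsG grid rows cols hops color fuel [(r, c, 0)]
                    (PySem.Set.add st.1 (r, c)) PySem.Dict.empty r c r c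
                (res.1, st.2.modify color [] (fun l => l ++ [res.2]))) sb) := by
        intro r hr sa sb hrel
        have hrb := PySem.List.mem_pyRange_one.mp hr
        refine pvFoldRel _ _ _ _ ?_ sa sb hrel
        intro c hc st st' hrel'
        have hcb := PySem.List.mem_pyRange_one.mp hc
        obtain ⟨hC, heq, hnd⟩ := hrel'
        simp only
        by_cases hguard : pvCell grid r c = 0 ∨ PySem.Set.contains st'.1 (r, c) = true
        · rw [if_pos hguard, if_pos (by rw [hC.2 r c hrb.1 hrb.2 hcb.1 hcb.2]; exact hguard)]
          exact ⟨hC, heq, hnd⟩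
        · rw [if_neg hguard, if_neg (by rw [hC.2 r c hrb.1 hrb.2 hcb.1 hcb.2]; exact hguard)]
          have hmark := pvInvC_mark hC hrb.1 hrb.2 hcb.1 hcb.2
          have hb := pvBfs_rel (grid := grid) (rows := rows) (cols := cols) (hops := hops)
            (color := pvCell grid r c)
            (rows.toNat * cols.toNat * (hops.toNat + 2) + 2) [(r, c, 0)]
            (pvSet2 st.1 r c true)
            (List.replicate rows.toNat (List.replicate cols.toNat (none : Option Int)))
            (PySem.Set.add st'.1 (r, c)) PySem.Dict.empty r c r c hmark pvInvZ_init
          refine ⟨hb.2, ?_, ?_⟩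
          · rw [heq, hb.1]
          · rw [PySem.Dict.keys_modify]
            exact PySem.Dict.nodup_keys_insert _ _ _ hnd
      have hinit : PvRel2 rows cols
          ((List.replicate rows.toNat (List.replicate cols.toNat false)),
            (PySem.Dict.empty : PySem.Dict Int (List (Int × Int × Int × Int))))
          ((PySem.Set.empty : PySem.Set (Int × Int)),
            (PySem.Dict.empty : PySem.Dict Int (List (Int × Int × Int × Int)))) := by
        exact ⟨pvInvC_init, rfl, by simp [PySem.Dict.keys, PySem.Dict.empty]⟩
      have H := pvFoldRel (PvRel2 rows cols) _ _ (PySem.List.pyRange 0 rows 1) hbody _ _ hinit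
      obtain ⟨hCf, heqf, hndf⟩ := H
      rw [heqf]
      exact pvFinalize_eq _ hndf


-- ---------- Layer 2: ground truth — blank-hop connectivity as a closure ----------

-- fixed per-component context: the grid, its bounds, the hop budget and the color
structure PvCtx where
  grid : List (List Int)
  rows : Int
  cols : Int
  hops : Int
  color : Int

def PvCtx.cell (C : PvCtx) (p : Int × Int) : Int := pvCell C.grid p.1 p.2
def PvCtx.inB (C : PvCtx) (p : Int × Int) : Prop :=
  0 ≤ p.1 ∧ p.1 < C.rows ∧ 0 ≤ p.2 ∧ p.2 < C.cols

-- 4-neighbourhood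
def pvAdj (p q : Int × Int) : Prop :=
  q = (p.1 - 1, p.2) ∨ q = (p.1 + 1, p.2) ∨ q = (p.1, p.2 - 1) ∨ q = (p.1, p.2 + 1)

-- a list of in-bound blank cells
def PvCtx.zrun (C : PvCtx) (zs : List (Int × Int)) : Prop :=
  ∀ z ∈ zs, C.inB z ∧ C.cell z = 0

-- two color cells joined by a run of ≤ hops blanks (or directly adjacent, zs = [])
def PvCtx.link (C : PvCtx) (x y : Int × Int) : Prop :=
  C.inB x ∧ C.inB y ∧ C.cell x = C.color ∧ C.cell y = C.color ∧
  ∃ zs, (zs.length : Int) ≤ C.hops ∧ C.zrun zs ∧ List.IsChain pvAdj (x :: (zs ++ [y]))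

-- the component of a seed
def PvCtx.cls (C : PvCtx) (s x : Int × Int) : Prop := Relation.ReflTransGen C.link s x

-- a partial blank run out of the component: zs ≠ [] blanks, chain starts at a
-- component cell, ends at z, has length v
def PvCtx.pz (C : PvCtx) (seed z : Int × Int) (v : Int) : Prop :=
  ∃ x zs, C.cls seed x ∧ C.inB x ∧ C.cell x = C.color ∧ zs ≠ [] ∧ (zs.length : Int) = v ∧
    C.zrun zs ∧ List.IsChain pvAdj (x :: zs) ∧ zs.getLast? = some z

theorem pvAdj_symm {p q : Int × Int} (h : pvAdj p q) : pvAdj q p := by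
  obtain ⟨a, b⟩ := p; obtain ⟨c, d⟩ := q
  simp only [pvAdj, Prod.ext_iff] at h ⊢
  omega

theorem pvChain_snoc {l : List (Int × Int)} {a n : Int × Int}
    (h : List.IsChain pvAdj l) (hl : l.getLast? = some a) (han : pvAdj a n) :
    List.IsChain pvAdj (l ++ [n]) := by
  refine List.IsChain.append h (List.isChain_singleton n) ?_
  intro x hx y hy
  simp only [List.head?_cons, Option.mem_def, Option.some.injEq] at hy
  rw [hl] at hx
  simp only [Option.mem_def, Option.some.injEq] at hx
  subst hx; subst hy; exact han

theorem pvLink_symm {C : PvCtx} {x y : Int × Int} (h : C.link x y) : C.link y x := by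
  obtain ⟨hx, hy, hcx, hcy, zs, hlen, hrun, hch⟩ := h
  refine ⟨hy, hx, hcy, hcx, zs.reverse, by simpa using hlen, ?_, ?_⟩
  · intro z hz; exact hrun z (by simpa using hz)
  · have : (x :: (zs ++ [y])).reverse = y :: (zs.reverse ++ [x]) := by simp
    rw [← this, List.isChain_reverse]
    exact hch.imp (fun _ _ h => pvAdj_symm h)

theorem pvCls_symm {C : PvCtx} {s x : Int × Int} (h : C.cls s x) : C.cls x s :=
  Relation.ReflTransGen.symmetric (fun _ _ hl => pvLink_symm hl) h

theorem pvCls_trans {C : PvCtx} {s x y : Int × Int} (h1 : C.cls s x) (h2 : C.cls x y) :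
    C.cls s y := Relation.ReflTransGen.trans h1 h2

theorem pvCls_colored {C : PvCtx} {s x : Int × Int}
    (hs : C.inB s ∧ C.cell s = C.color) (h : C.cls s x) : C.inB x ∧ C.cell x = C.color := by
  induction h with
  | refl => exact hs
  | tail _ hlink ih => exact ⟨hlink.2.1, hlink.2.2.2.1⟩

-- extremes of a set of cells: exactly (top, left, bottom, right)
def pvIsExt (S : Int × Int → Prop) (b : Int × Int × Int × Int) : Prop :=
  (∀ p, S p → b.1 ≤ p.1 ∧ b.2.1 ≤ p.2 ∧ p.1 ≤ b.2.2.1 ∧ p.2 ≤ b.2.2.2) ∧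
  (∃ p, S p ∧ p.1 = b.1) ∧ (∃ p, S p ∧ p.2 = b.2.1) ∧
  (∃ p, S p ∧ p.1 = b.2.2.1) ∧ (∃ p, S p ∧ p.2 = b.2.2.2)

theorem pvIsExt_unique {S : Int × Int → Prop} {b b' : Int × Int × Int × Int}
    (h : pvIsExt S b) (h' : pvIsExt S b') : b = b' := by
  obtain ⟨hub, ⟨p1, hp1, e1⟩, ⟨p2, hp2, e2⟩, ⟨p3, hp3, e3⟩, ⟨p4, hp4, e4⟩⟩ := h
  obtain ⟨hub', ⟨q1, hq1, f1⟩, ⟨q2, hq2, f2⟩, ⟨q3, hq3, f3⟩, ⟨q4, hq4, f4⟩⟩ := h'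
  have g1 := hub _ hq1; have g2 := hub _ hq2; have g3 := hub _ hq3; have g4 := hub _ hq4
  have g5 := hub' _ hp1; have g6 := hub' _ hp2; have g7 := hub' _ hp3; have g8 := hub' _ hp4
  obtain ⟨a1, b1, c1, d1⟩ := b; obtain ⟨a2, b2, c2, d2⟩ := b'
  simp only [Prod.ext_iff] at *
  refine ⟨by omega, by omega, by omega, by omega⟩

theorem pvIsExt_congr {S T : Int × Int → Prop} {b : Int × Int × Int × Int}
    (hiff : ∀ p, S p ↔ T p) (h : pvIsExt S b) : pvIsExt T b := by
  obtain ⟨hub, h1, h2, h3, h4⟩ := h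
  exact ⟨fun p hp => hub p ((hiff p).mpr hp),
    h1.imp (fun p hp => ⟨(hiff p).mp hp.1, hp.2⟩),
    h2.imp (fun p hp => ⟨(hiff p).mp hp.1, hp.2⟩),
    h3.imp (fun p hp => ⟨(hiff p).mp hp.1, hp.2⟩),
    h4.imp (fun p hp => ⟨(hiff p).mp hp.1, hp.2⟩)⟩

theorem pvIsExt_insert {S : Int × Int → Prop} {b : Int × Int × Int × Int} {x : Int × Int}
    (h : pvIsExt S b) :
    pvIsExt (fun p => S p ∨ p = x)
      (min b.1 x.1, min b.2.1 x.2, max b.2.2.1 x.1, max b.2.2.2 x.2) := by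
  obtain ⟨hub, ⟨p1, hp1, e1⟩, ⟨p2, hp2, e2⟩, ⟨p3, hp3, e3⟩, ⟨p4, hp4, e4⟩⟩ := h
  constructor
  · rintro p (hp | rfl)
    · have := hub p hp
      simp only
      omega
    · simp only
      omega
  · refine ⟨?_, ?_, ?_, ?_⟩
    · rcases le_total b.1 x.1 with hle | hle
      · exact ⟨p1, Or.inl hp1, by simp only; omega⟩
      · exact ⟨x, Or.inr rfl, by simp only; omega⟩
    · rcases le_total b.2.1 x.2 with hle | hle
      · exact ⟨p2, Or.inl hp2, by simp only; omega⟩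
      · exact ⟨x, Or.inr rfl, by simp only; omega⟩
    · rcases le_total x.1 b.2.2.1 with hle | hle
      · exact ⟨p3, Or.inl hp3, by simp only; omega⟩
      · exact ⟨x, Or.inr rfl, by simp only; omega⟩
    · rcases le_total x.2 b.2.2.2 with hle | hle
      · exact ⟨p4, Or.inl hp4, by simp only; omega⟩
      · exact ⟨x, Or.inr rfl, by simp only; omega⟩

-- all in-bound cells, for the termination potentials
def pvCells (C : PvCtx) : List (Int × Int) :=
  (List.range C.rows.toNat).flatMap (fun i => (List.range C.cols.toNat).map
    (fun j => ((i : Int), (j : Int))))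

theorem pvCells_mem {C : PvCtx} {p : Int × Int} : p ∈ pvCells C ↔ C.inB p := by
  obtain ⟨a, b⟩ := p
  simp [pvCells, PvCtx.inB, Prod.ext_iff]
  constructor
  · rintro ⟨i, hi, j, hj, h1, h2⟩
    omega
  · rintro ⟨h1, h2, h3, h4⟩
    exact ⟨⟨a.toNat, by omega, by omega⟩, ⟨b.toNat, by omega, by omega⟩⟩

theorem pvCells_len {C : PvCtx} : (pvCells C).length = C.rows.toNat * C.cols.toNat := by
  simp [pvCells, List.length_flatMap]

-- sum arithmetic for the potentials
theorem pvSumLe {α : Type} (l : List α) (f : α → Nat) (c : Nat) (h : ∀ x ∈ l, f x ≤ c) :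
    (l.map f).sum ≤ c * l.length := by
  induction l with
  | nil => simp
  | cons x xs ih =>
    simp only [List.map_cons, List.sum_cons, List.length_cons]
    have := h x List.mem_cons_self
    have := ih (fun y hy => h y (List.mem_cons_of_mem _ hy))
    calc f x + (xs.map f).sum ≤ c + c * xs.length := by omega
    _ = c * (xs.length + 1) := by ring

theorem pvSumMono {α : Type} (l : List α) (f g : α → Nat) (h : ∀ x ∈ l, f x ≤ g x) :
    (l.map f).sum ≤ (l.map g).sum := by
  induction l with
  | nil => simp
  | cons x xs ih =>
    simp only [List.map_cons, List.sum_cons]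
    have := h x List.mem_cons_self
    have := ih (fun y hy => h y (List.mem_cons_of_mem _ hy))
    omega

theorem pvSumDrop {α : Type} (l : List α) (f g : α → Nat) (n : α)
    (h : ∀ x ∈ l, f x ≤ g x) (hn : n ∈ l) (hs : f n + 1 ≤ g n) :
    (l.map f).sum + 1 ≤ (l.map g).sum := by
  induction l with
  | nil => cases hn
  | cons x xs ih =>
    simp only [List.map_cons, List.sum_cons]
    rcases List.mem_cons.mp hn with rfl | hn'
    · have := pvSumMono xs f g (fun y hy => h y (List.mem_cons_of_mem _ hy))
      omega
    · have := h x List.mem_cons_self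
      have := ih (fun y hy => h y (List.mem_cons_of_mem _ hy)) hn'
      omega

-- ---------- Layer 3: characterizing the ghost BFS against the closure ----------

def pvQCell (e : Int × Int × Int) : Int × Int := (e.1, e.2.1)

-- "every neighbour of p has been relaxed from blank budget v"
def PvCtx.rel (C : PvCtx) (seen : PySem.Set (Int × Int)) (bb : PySem.Dict (Int × Int) Int)
    (p : Int × Int) (v : Int) : Prop :=
  ∀ n, pvAdj p n → C.inB n →
    (C.cell n = C.color → n ∈ seen) ∧
    (C.cell n = 0 → v + 1 ≤ C.hops → ∃ w, w ≤ v + 1 ∧ bb.get? n = some w)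

-- the data invariant of the ghost BFS (everything except pending relaxation and the box)
def PvCtx.core (C : PvCtx) (seed : Int × Int) (V : PySem.Set (Int × Int))
    (q : List (Int × Int × Int)) (seen : PySem.Set (Int × Int))
    (bb : PySem.Dict (Int × Int) Int) : Prop :=
  (∀ p, p ∈ V → p ∈ seen) ∧
  seed ∈ seen ∧
  (∀ p, p ∈ seen → p ∈ V ∨ (C.inB p ∧ C.cell p = C.color ∧ C.cls seed p)) ∧
  (∀ e ∈ q, C.inB (pvQCell e) ∧
    ((C.cell (pvQCell e) = C.color ∧ e.2.2 = 0 ∧ C.cls seed (pvQCell e) ∧ pvQCell e ∈ seen) ∨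
     (C.cell (pvQCell e) = 0 ∧ 1 ≤ e.2.2 ∧ e.2.2 ≤ C.hops ∧ C.pz seed (pvQCell e) e.2.2))) ∧
  (∀ z v, bb.get? z = some v → C.inB z ∧ C.cell z = 0 ∧ 1 ≤ v ∧ v ≤ C.hops ∧ C.pz seed z v) ∧
  (∀ e ∈ q, C.cell (pvQCell e) = 0 → ∃ w, w ≤ e.2.2 ∧ bb.get? (pvQCell e) = some w) ∧
  List.Nodup q

-- pending relaxation obligations, witnessed by queue entries
def PvCtx.pend (C : PvCtx) (V : PySem.Set (Int × Int)) (q : List (Int × Int × Int))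
    (seen : PySem.Set (Int × Int)) (bb : PySem.Dict (Int × Int) Int) : Prop :=
  (∀ p : Int × Int, p ∈ seen → p ∉ V → ((p.1, p.2, (0 : Int)) ∈ q ∨ C.rel seen bb p 0)) ∧
  (∀ z v, bb.get? z = some v → ((z.1, z.2, v) ∈ q ∨ C.rel seen bb z v))

-- the cells whose box contribution has already been folded in
def pvBoxSet (seed : Int × Int) (V : PySem.Set (Int × Int)) (q : List (Int × Int × Int))
    (seen : PySem.Set (Int × Int)) : Int × Int → Prop :=
  fun p => p = seed ∨ (p ∈ seen ∧ p ∉ V ∧ (p.1, p.2, (0 : Int)) ∉ q)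

-- termination potential
def pvPhi (C : PvCtx) (q : List (Int × Int × Int)) (seen : PySem.Set (Int × Int))
    (bb : PySem.Dict (Int × Int) Int) : Nat :=
  q.length +
  ((pvCells C).map (fun p => if p ∈ seen then 0 else 1)).sum +
  ((pvCells C).map (fun p => match bb.get? p with
    | none => C.hops.toNat
    | some v => (v - 1).toNat)).sum

theorem pvNodupSnoc {α : Type} {l : List α} {e : α} (h : l.Nodup) (h2 : e ∉ l) :
    (l ++ [e]).Nodup := by
  rw [List.nodup_append]
  refine ⟨h, List.nodup_singleton e, ?_⟩
  intro a ha b hb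
  simp only [List.mem_singleton] at hb
  subst hb
  exact fun hc => h2 (hc ▸ ha)

theorem pvGetLast?_cons_ne {zs : List (Int × Int)} {x z : Int × Int}
    (hne : zs ≠ []) (hlast : zs.getLast? = some z) : (x :: zs).getLast? = some z := by
  cases zs with
  | nil => cases hne rfl
  | cons a l => rw [List.getLast?_cons_cons]; exact hlast

-- reaching a color neighbour extends the component
theorem pvCls_step_color {C : PvCtx} {seed p0 n : Int × Int} {v0 : Int}
    (hh : 0 ≤ C.hops) (hp0 : C.inB p0)
    (hctx : (C.cell p0 = C.color ∧ v0 = 0 ∧ C.cls seed p0) ∨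
            (C.cell p0 = 0 ∧ 1 ≤ v0 ∧ v0 ≤ C.hops ∧ C.pz seed p0 v0))
    (hadj : pvAdj p0 n) (hnB : C.inB n) (hnc : C.cell n = C.color) : C.cls seed n := by
  rcases hctx with ⟨hc, _, hcls⟩ | ⟨hz, h1, h2, x, zs, hclsx, hxB, hxc, hne, hlen, hrun, hch, hlast⟩
  · have hlink : C.link p0 n := by
      refine ⟨hp0, hnB, hc, hnc, [], by simpa using hh, ?_, ?_⟩
      · intro z hz0; cases hz0
      · simpa using List.isChain_pair.mpr hadj
    exact pvCls_trans hcls (Relation.ReflTransGen.single hlink)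
  · have hchn : List.IsChain pvAdj (x :: (zs ++ [n])) := by
      have := pvChain_snoc hch (pvGetLast?_cons_ne hne hlast) hadj
      simpa using this
    have hlink : C.link x n := ⟨hxB, hnB, hxc, hnc, zs, by omega, hrun, hchn⟩
    exact pvCls_trans hclsx (Relation.ReflTransGen.single hlink)

-- stepping onto one more blank extends a partial run
theorem pvPz_step {C : PvCtx} {seed p0 n : Int × Int} {v0 : Int}
    (hp0 : C.inB p0)
    (hctx : (C.cell p0 = C.color ∧ v0 = 0 ∧ C.cls seed p0) ∨
            (C.cell p0 = 0 ∧ 1 ≤ v0 ∧ v0 ≤ C.hops ∧ C.pz seed p0 v0))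
    (hadj : pvAdj p0 n) (hnB : C.inB n) (hnc : C.cell n = 0) : C.pz seed n (v0 + 1) := by
  rcases hctx with ⟨hc, hv0, hcls⟩ | ⟨hz, h1, h2, x, zs, hclsx, hxB, hxc, hne, hlen, hrun, hch, hlast⟩
  · refine ⟨p0, [n], hcls, hp0, hc, by simp, by simp [hv0], ?_, ?_, by simp⟩
    · intro z hz; simp only [List.mem_singleton] at hz; subst hz; exact ⟨hnB, hnc⟩
    · exact List.isChain_pair.mpr hadj
  · refine ⟨x, zs ++ [n], hclsx, hxB, hxc, by simp, by simp; omega, ?_, ?_, List.getLast?_concat⟩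
    · intro z hz
      rcases List.mem_append.mp hz with hz | hz
      · exact hrun z hz
      · simp only [List.mem_singleton] at hz; subst hz; exact ⟨hnB, hnc⟩
    · have := pvChain_snoc hch (pvGetLast?_cons_ne hne hlast) hadj
      simpa using this

-- one ghost relaxation step: everything the pop-level proof needs about it
theorem pvStepG_pres (C : PvCtx) (seed : Int × Int) (V : PySem.Set (Int × Int))
    (hh : 0 ≤ C.hops) (hcol0 : C.color ≠ 0)
    (p0 : Int × Int) (v0 : Int) (hp0 : C.inB p0) (hv0 : 0 ≤ v0)
    (hctx : (C.cell p0 = C.color ∧ v0 = 0 ∧ C.cls seed p0) ∨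
            (C.cell p0 = 0 ∧ 1 ≤ v0 ∧ v0 ≤ C.hops ∧ C.pz seed p0 v0))
    (n : Int × Int) (hadj : pvAdj p0 n)
    (s : List (Int × Int × Int) × PySem.Set (Int × Int) × PySem.Dict (Int × Int) Int)
    (hcore : C.core seed V s.1 s.2.1 s.2.2) :
    C.core seed V (pvStepG C.grid C.rows C.cols C.hops C.color v0 s n).1
        (pvStepG C.grid C.rows C.cols C.hops C.color v0 s n).2.1
        (pvStepG C.grid C.rows C.cols C.hops C.color v0 s n).2.2 ∧
    (∃ ext, (pvStepG C.grid C.rows C.cols C.hops C.color v0 s n).1 = s.1 ++ ext) ∧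
    (∀ p, p ∈ s.2.1 → p ∈ (pvStepG C.grid C.rows C.cols C.hops C.color v0 s n).2.1) ∧
    (∀ z w, s.2.2.get? z = some w →
      ∃ w', w' ≤ w ∧ (pvStepG C.grid C.rows C.cols C.hops C.color v0 s n).2.2.get? z = some w') ∧
    (C.inB n →
      (C.cell n = C.color → n ∈ (pvStepG C.grid C.rows C.cols C.hops C.color v0 s n).2.1) ∧
      (C.cell n = 0 → v0 + 1 ≤ C.hops →
        ∃ w, w ≤ v0 + 1 ∧ (pvStepG C.grid C.rows C.cols C.hops C.color v0 s n).2.2.get? n = some w)) ∧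
    (∀ p : Int × Int, (p.1, p.2, (0 : Int)) ∈ (pvStepG C.grid C.rows C.cols C.hops C.color v0 s n).1 →
      (p.1, p.2, (0 : Int)) ∈ s.1 ∨ p ∉ s.2.1) ∧
    (∀ p, p ∈ (pvStepG C.grid C.rows C.cols C.hops C.color v0 s n).2.1 →
      p ∈ s.2.1 ∨ (p.1, p.2, (0 : Int)) ∈ (pvStepG C.grid C.rows C.cols C.hops C.color v0 s n).1) ∧
    (∀ z w, (pvStepG C.grid C.rows C.cols C.hops C.color v0 s n).2.2.get? z = some w →
      s.2.2.get? z = some w ∨ (z.1, z.2, w) ∈ (pvStepG C.grid C.rows C.cols C.hops C.color v0 s n).1) ∧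
    pvPhi C (pvStepG C.grid C.rows C.cols C.hops C.color v0 s n).1
        (pvStepG C.grid C.rows C.cols C.hops C.color v0 s n).2.1
        (pvStepG C.grid C.rows C.cols C.hops C.color v0 s n).2.2 ≤ pvPhi C s.1 s.2.1 s.2.2 := by
  obtain ⟨q, seen, bb⟩ := s
  obtain ⟨hV, hseed, hseen, hq, hbb, hq6, hnd⟩ := hcore
  dsimp only at hV hseed hseen hq hbb hq6 hnd
  by_cases hB : 0 ≤ n.1 ∧ n.1 < C.rows ∧ 0 ≤ n.2 ∧ n.2 < C.cols
  case neg =>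
    have hstep : pvStepG C.grid C.rows C.cols C.hops C.color v0 (q, seen, bb) n = (q, seen, bb) := by
      simp only [pvStepG, Prod.mk.eta]
      rw [if_neg hB]
    rw [hstep]
    dsimp only
    exact ⟨⟨hV, hseed, hseen, hq, hbb, hq6, hnd⟩, ⟨[], by simp⟩, fun p hp => hp,
      fun z w hw => ⟨w, le_refl w, hw⟩, fun hnB => absurd hnB hB,
      fun p hp => Or.inl hp, fun p hp => Or.inl hp, fun z w hzw => Or.inl hzw, le_refl _⟩
  case pos =>
  have hnB : C.inB n := hB
  have hncells : n ∈ pvCells C := pvCells_mem.mpr hnB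
  by_cases hcolr : pvCell C.grid n.1 n.2 = C.color
  · -- colored neighbour
    have hccol : C.cell n = C.color := hcolr
    by_cases hseenb : PySem.Set.contains seen n = false
    · -- fresh: mark and enqueue
      have hstep : pvStepG C.grid C.rows C.cols C.hops C.color v0 (q, seen, bb) n
          = (q ++ [(n.1, n.2, 0)], PySem.Set.add seen n, bb) := by
        simp only [pvStepG, Prod.mk.eta]
        rw [if_pos hB, if_pos hcolr, if_pos hseenb]
      rw [hstep]
      dsimp only
      have hnot : n ∉ seen := by
        intro hmem
        rw [← PySem.Set.contains_iff] at hmem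
        rw [hmem] at hseenb
        cases hseenb
      have hclsn : C.cls seed n := pvCls_step_color hh hp0 hctx hadj hnB hccol
      have hqnew : ((n.1, n.2, (0 : Int))) ∉ q := by
        intro hmem
        obtain ⟨hiB, hcase⟩ := hq _ hmem
        rcases hcase with ⟨_, _, _, hs⟩ | ⟨hzz, _, _, _⟩
        · exact hnot hs
        · exact (Ne.symm hcol0) ((hzz : C.cell n = 0).symm.trans hccol)
      refine ⟨⟨?_, ?_, ?_, ?_, hbb, ?_, ?_⟩, ⟨[(n.1, n.2, 0)], rfl⟩, ?_, ?_, ?_, ?_, ?_,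
        fun z w hzw => Or.inl hzw, ?_⟩
      · intro p hp; exact (PySem.Set.mem_add seen n p).mpr (Or.inl (hV p hp))
      · exact (PySem.Set.mem_add seen n seed).mpr (Or.inl hseed)
      · intro p hp
        rcases (PySem.Set.mem_add seen n p).mp hp with hp' | rfl
        · exact hseen p hp'
        · exact Or.inr ⟨hnB, hccol, hclsn⟩
      · intro e he
        rcases List.mem_append.mp he with he' | he'
        · obtain ⟨hiB, hcase⟩ := hq e he'
          refine ⟨hiB, ?_⟩
          rcases hcase with ⟨a, b, c, d⟩ | hzz
          · exact Or.inl ⟨a, b, c, (PySem.Set.mem_add seen n _).mpr (Or.inl d)⟩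
          · exact Or.inr hzz
        · simp only [List.mem_singleton] at he'
          subst he'
          exact ⟨hnB, Or.inl ⟨hccol, rfl, hclsn, (PySem.Set.mem_add seen n n).mpr (Or.inr rfl)⟩⟩
      · intro e he hez
        rcases List.mem_append.mp he with he' | he'
        · exact hq6 e he' hez
        · simp only [List.mem_singleton] at he'
          subst he'
          exact absurd ((hez : C.cell n = 0).symm.trans hccol) (Ne.symm hcol0)
      · exact pvNodupSnoc hnd hqnew
      · intro p hp; exact (PySem.Set.mem_add seen n p).mpr (Or.inl hp)
      · intro z w hw; exact ⟨w, le_refl w, hw⟩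
      · intro _
        refine ⟨fun _ => (PySem.Set.mem_add seen n n).mpr (Or.inr rfl), fun h0 _ => ?_⟩
        exact absurd (h0.symm.trans hccol) (Ne.symm hcol0)
      · intro p hp
        rcases List.mem_append.mp hp with hp' | hp'
        · exact Or.inl hp'
        · have heq := List.mem_singleton.mp hp'
          have h1 : p.1 = n.1 := congrArg (fun t => t.1) heq
          have h2 : p.2 = n.2 := congrArg (fun t => t.2.1) heq
          right
          intro hmem
          exact hnot ((Prod.ext_iff.mpr ⟨h1, h2⟩ : p = n) ▸ hmem)
      · intro p hp
        rcases (PySem.Set.mem_add seen n p).mp hp with hp' | rfl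
        · exact Or.inl hp'
        · exact Or.inr (List.mem_append.mpr (Or.inr (List.mem_singleton.mpr rfl)))
      · unfold pvPhi
        have hdrop : ((pvCells C).map (fun p => if p ∈ PySem.Set.add seen n then 0 else 1)).sum + 1 ≤
            ((pvCells C).map (fun p => if p ∈ seen then 0 else 1)).sum := by
          refine pvSumDrop (pvCells C) _ _ n ?_ hncells ?_
          · intro x hx
            by_cases hxs : x ∈ seen
            · simp [hxs, (PySem.Set.mem_add seen n x).mpr (Or.inl hxs)]
            · rw [if_neg hxs]
              split <;> omega
          · simp [hnot, (PySem.Set.mem_add seen n n).mpr (Or.inr rfl)]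
        simp only [List.length_append, List.length_singleton]
        omega
    · -- already seen: no change
      have hstep : pvStepG C.grid C.rows C.cols C.hops C.color v0 (q, seen, bb) n
          = (q, seen, bb) := by
        simp only [pvStepG, Prod.mk.eta]
        rw [if_pos hB, if_pos hcolr, if_neg hseenb]
      rw [hstep]
      dsimp only
      have hmem : n ∈ seen := by
        rw [← PySem.Set.contains_iff]
        cases h : PySem.Set.contains seen n
        · exact absurd h hseenb
        · rfl
      exact ⟨⟨hV, hseed, hseen, hq, hbb, hq6, hnd⟩, ⟨[], by simp⟩, fun p hp => hp,
        fun z w hw => ⟨w, le_refl w, hw⟩,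
        fun _ => ⟨fun _ => hmem, fun h0 _ => absurd (h0.symm.trans hccol) (Ne.symm hcol0)⟩,
        fun p hp => Or.inl hp, fun p hp => Or.inl hp, fun z w hzw => Or.inl hzw, le_refl _⟩
  · -- not the color
    by_cases hz : pvCell C.grid n.1 n.2 = 0 ∧ v0 < C.hops
    · -- blank with remaining budget: relax
      have hcz : C.cell n = 0 := hz.1
      have hpz : C.pz seed n (v0 + 1) := pvPz_step hp0 hctx hadj hnB hcz
      cases hbbn : bb.get? n with
      | none =>
        have hstep : pvStepG C.grid C.rows C.cols C.hops C.color v0 (q, seen, bb) n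
            = (q ++ [(n.1, n.2, v0 + 1)], seen, bb.insert n (v0 + 1)) := by
          simp only [pvStepG, Prod.mk.eta]
          rw [if_pos hB, if_neg hcolr, if_pos hz, hbbn]
        rw [hstep]
        dsimp only
        have hqnew : ((n.1, n.2, v0 + 1)) ∉ q := by
          intro hmem
          obtain ⟨w, hw, hbbw⟩ := hq6 _ hmem hcz
          have hbbw' : bb.get? n = some w := hbbw
          rw [hbbn] at hbbw'
          cases hbbw'
        refine ⟨⟨hV, hseed, hseen, ?_, ?_, ?_, ?_⟩, ⟨[(n.1, n.2, v0 + 1)], rfl⟩,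
          fun p hp => hp, ?_, ?_, ?_, fun p hp => Or.inl hp, ?_, ?_⟩
        · intro e he
          rcases List.mem_append.mp he with he' | he'
          · exact hq e he'
          · simp only [List.mem_singleton] at he'
            subst he'
            exact ⟨hnB, Or.inr ⟨hcz, by show (1:Int) ≤ v0 + 1; omega, by show v0 + 1 ≤ C.hops; omega, hpz⟩⟩
        · intro z v hzv
          by_cases hzn : z = n
          · subst hzn
            rw [PySem.Dict.get?_insert, if_pos rfl] at hzv
            cases hzv
            exact ⟨hnB, hcz, by omega, by omega, hpz⟩
          · rw [PySem.Dict.get?_insert, if_neg hzn] at hzv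
            exact hbb z v hzv
        · intro e he hez
          rcases List.mem_append.mp he with he' | he'
          · obtain ⟨w, hw, hbbw⟩ := hq6 e he' hez
            by_cases hzn : pvQCell e = n
            · rw [hzn, hbbn] at hbbw
              cases hbbw
            · exact ⟨w, hw, by rw [PySem.Dict.get?_insert, if_neg hzn]; exact hbbw⟩
          · simp only [List.mem_singleton] at he'
            subst he'
            exact ⟨v0 + 1, le_refl _, show (bb.insert n (v0 + 1)).get? n = some (v0 + 1) by
              rw [PySem.Dict.get?_insert, if_pos rfl]⟩
        · exact pvNodupSnoc hnd hqnew
        · intro z w hzw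
          by_cases hzn : z = n
          · subst hzn
            rw [hbbn] at hzw
            cases hzw
          · exact ⟨w, le_refl w, by rw [PySem.Dict.get?_insert, if_neg hzn]; exact hzw⟩
        · intro _
          refine ⟨fun hcc => absurd hcc hcolr, fun _ _ => ?_⟩
          exact ⟨v0 + 1, le_refl _, by rw [PySem.Dict.get?_insert, if_pos rfl]⟩
        · intro p hp
          rcases List.mem_append.mp hp with hp' | hp'
          · exact Or.inl hp'
          · have heq := List.mem_singleton.mp hp'
            have h3 : (0 : Int) = v0 + 1 := congrArg (fun t => t.2.2) heq
            omega
        · intro z w hzw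
          by_cases hzn : z = n
          · subst hzn
            rw [PySem.Dict.get?_insert, if_pos rfl] at hzw
            cases hzw
            exact Or.inr (List.mem_append.mpr (Or.inr (List.mem_singleton.mpr rfl)))
          · rw [PySem.Dict.get?_insert, if_neg hzn] at hzw
            exact Or.inl hzw
        · unfold pvPhi
          have hdrop : ((pvCells C).map (fun p => match (bb.insert n (v0 + 1)).get? p with
                | none => C.hops.toNat
                | some v => (v - 1).toNat)).sum + 1 ≤
              ((pvCells C).map (fun p => match bb.get? p with
                | none => C.hops.toNat
                | some v => (v - 1).toNat)).sum := by
            refine pvSumDrop (pvCells C) _ _ n ?_ hncells ?_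
            · intro x hx
              by_cases hxn : x = n
              · subst hxn
                rw [hbbn, PySem.Dict.get?_insert, if_pos rfl]
                show (v0 + 1 - 1).toNat ≤ C.hops.toNat
                omega
              · rw [PySem.Dict.get?_insert, if_neg hxn]
            · rw [hbbn, PySem.Dict.get?_insert, if_pos rfl]
              show (v0 + 1 - 1).toNat + 1 ≤ C.hops.toNat
              omega
          simp only [List.length_append, List.length_singleton]
          omega
      | some best =>
        have hbest := hbb n best hbbn
        by_cases himp : v0 + 1 < best
        · have hstep : pvStepG C.grid C.rows C.cols C.hops C.color v0 (q, seen, bb) n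
              = (q ++ [(n.1, n.2, v0 + 1)], seen, bb.insert n (v0 + 1)) := by
            simp only [pvStepG, Prod.mk.eta]
            rw [if_pos hB, if_neg hcolr, if_pos hz, hbbn]
            dsimp only
            rw [if_pos himp]
          rw [hstep]
          dsimp only
          have hqnew : ((n.1, n.2, v0 + 1)) ∉ q := by
            intro hmem
            obtain ⟨w, hw, hbbw⟩ := hq6 _ hmem hcz
            have hw' : w ≤ v0 + 1 := hw
            have hbbw' : bb.get? n = some w := hbbw
            rw [hbbn] at hbbw'
            cases hbbw'
            omega
          refine ⟨⟨hV, hseed, hseen, ?_, ?_, ?_, ?_⟩, ⟨[(n.1, n.2, v0 + 1)], rfl⟩,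
            fun p hp => hp, ?_, ?_, ?_, fun p hp => Or.inl hp, ?_, ?_⟩
          · intro e he
            rcases List.mem_append.mp he with he' | he'
            · exact hq e he'
            · simp only [List.mem_singleton] at he'
              subst he'
              exact ⟨hnB, Or.inr ⟨hcz, by show (1:Int) ≤ v0 + 1; omega, by show v0 + 1 ≤ C.hops; omega, hpz⟩⟩
          · intro z v hzv
            by_cases hzn : z = n
            · subst hzn
              rw [PySem.Dict.get?_insert, if_pos rfl] at hzv
              cases hzv
              exact ⟨hnB, hcz, by omega, by omega, hpz⟩
            · rw [PySem.Dict.get?_insert, if_neg hzn] at hzv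
              exact hbb z v hzv
          · intro e he hez
            rcases List.mem_append.mp he with he' | he'
            · obtain ⟨w, hw, hbbw⟩ := hq6 e he' hez
              by_cases hzn : pvQCell e = n
              · rw [hzn, hbbn] at hbbw
                cases hbbw
                exact ⟨v0 + 1, by omega, by rw [hzn, PySem.Dict.get?_insert, if_pos rfl]⟩
              · exact ⟨w, hw, by rw [PySem.Dict.get?_insert, if_neg hzn]; exact hbbw⟩
            · simp only [List.mem_singleton] at he'
              subst he'
              exact ⟨v0 + 1, le_refl _, show (bb.insert n (v0 + 1)).get? n = some (v0 + 1) by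
                rw [PySem.Dict.get?_insert, if_pos rfl]⟩
          · exact pvNodupSnoc hnd hqnew
          · intro z w hzw
            by_cases hzn : z = n
            · subst hzn
              rw [hbbn] at hzw
              cases hzw
              exact ⟨v0 + 1, by omega, by rw [PySem.Dict.get?_insert, if_pos rfl]⟩
            · exact ⟨w, le_refl w, by rw [PySem.Dict.get?_insert, if_neg hzn]; exact hzw⟩
          · intro _
            refine ⟨fun hcc => absurd hcc hcolr, fun _ _ => ?_⟩
            exact ⟨v0 + 1, le_refl _, by rw [PySem.Dict.get?_insert, if_pos rfl]⟩
          · intro p hp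
            rcases List.mem_append.mp hp with hp' | hp'
            · exact Or.inl hp'
            · have heq := List.mem_singleton.mp hp'
              have h3 : (0 : Int) = v0 + 1 := congrArg (fun t => t.2.2) heq
              omega
          · intro z w hzw
            by_cases hzn : z = n
            · subst hzn
              rw [PySem.Dict.get?_insert, if_pos rfl] at hzw
              cases hzw
              exact Or.inr (List.mem_append.mpr (Or.inr (List.mem_singleton.mpr rfl)))
            · rw [PySem.Dict.get?_insert, if_neg hzn] at hzw
              exact Or.inl hzw
          · unfold pvPhi
            have hdrop : ((pvCells C).map (fun p => match (bb.insert n (v0 + 1)).get? p with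
                  | none => C.hops.toNat
                  | some v => (v - 1).toNat)).sum + 1 ≤
                ((pvCells C).map (fun p => match bb.get? p with
                  | none => C.hops.toNat
                  | some v => (v - 1).toNat)).sum := by
              refine pvSumDrop (pvCells C) _ _ n ?_ hncells ?_
              · intro x hx
                by_cases hxn : x = n
                · subst hxn
                  rw [hbbn, PySem.Dict.get?_insert, if_pos rfl]
                  show (v0 + 1 - 1).toNat ≤ (best - 1).toNat
                  have h1 : 1 ≤ best := hbest.2.2.1
                  omega
                · rw [PySem.Dict.get?_insert, if_neg hxn]
              · rw [hbbn, PySem.Dict.get?_insert, if_pos rfl]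
                show (v0 + 1 - 1).toNat + 1 ≤ (best - 1).toNat
                have h1 : 1 ≤ best := hbest.2.2.1
                omega
            simp only [List.length_append, List.length_singleton]
            omega
        · -- already known at least as cheaply: no change
          have hstep : pvStepG C.grid C.rows C.cols C.hops C.color v0 (q, seen, bb) n
              = (q, seen, bb) := by
            simp only [pvStepG, Prod.mk.eta]
            rw [if_pos hB, if_neg hcolr, if_pos hz, hbbn]
            dsimp only
            rw [if_neg himp]
          rw [hstep]
          dsimp only
          exact ⟨⟨hV, hseed, hseen, hq, hbb, hq6, hnd⟩, ⟨[], by simp⟩, fun p hp => hp,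
            fun z w hw => ⟨w, le_refl w, hw⟩,
            fun _ => ⟨fun hcc => absurd hcc hcolr,
              fun _ _ => ⟨best, by omega, hbbn⟩⟩,
            fun p hp => Or.inl hp, fun p hp => Or.inl hp, fun z w hzw => Or.inl hzw, le_refl _⟩
    · -- different color, or budget exhausted: no change
      have hstep : pvStepG C.grid C.rows C.cols C.hops C.color v0 (q, seen, bb) n
          = (q, seen, bb) := by
        simp only [pvStepG, Prod.mk.eta]
        rw [if_pos hB, if_neg hcolr, if_neg hz]
      rw [hstep]
      dsimp only
      exact ⟨⟨hV, hseed, hseen, hq, hbb, hq6, hnd⟩, ⟨[], by simp⟩, fun p hp => hp,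
        fun z w hw => ⟨w, le_refl w, hw⟩,
        fun _ => ⟨fun hcc => absurd hcc hcolr, fun h0 hle => absurd (show pvCell C.grid n.1 n.2 = 0 ∧ v0 < C.hops from ⟨h0, by omega⟩) hz⟩,
        fun p hp => Or.inl hp, fun p hp => Or.inl hp, fun z w hzw => Or.inl hzw, le_refl _⟩

theorem pvRel_mono {C : PvCtx} {seen seen' : PySem.Set (Int × Int)}
    {bb bb' : PySem.Dict (Int × Int) Int} {p : Int × Int} {v : Int}
    (h : C.rel seen bb p v)
    (hs : ∀ x, x ∈ seen → x ∈ seen')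
    (hb : ∀ z w, bb.get? z = some w → ∃ w', w' ≤ w ∧ bb'.get? z = some w') :
    C.rel seen' bb' p v := by
  intro n hadj hnB
  refine ⟨fun hc => hs _ ((h n hadj hnB).1 hc), fun h0 hle => ?_⟩
  obtain ⟨w, hw, hg⟩ := (h n hadj hnB).2 h0 hle
  obtain ⟨w', hw', hg'⟩ := hb _ _ hg
  exact ⟨w', by omega, hg'⟩

-- walking a blank run through a fully relaxed table
theorem pvWalkAuxG (C : PvCtx) (seen : PySem.Set (Int × Int)) (bb : PySem.Dict (Int × Int) Int)
    (hrelz : ∀ z v, bb.get? z = some v → C.rel seen bb z v) :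
    ∀ (rest : List (Int × Int)) (z : Int × Int) (v : Int) (y : Int × Int),
      bb.get? z = some v → (v + (rest.length : Int)) ≤ C.hops → C.zrun rest →
      List.IsChain pvAdj (z :: (rest ++ [y])) → C.inB y → C.cell y = C.color →
      y ∈ seen := by
  intro rest
  induction rest with
  | nil =>
    intro z v y hz hlen hrun hch hyB hyc
    have hadj : pvAdj z y := by
      simpa using hch
    exact ((hrelz z v hz) y hadj hyB).1 hyc
  | cons z2 rest' ih =>
    intro z v y hz hlen hrun hch hyB hyc
    have hch' : pvAdj z z2 ∧ List.IsChain pvAdj (z2 :: (rest' ++ [y])) := by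
      have := List.isChain_cons_cons.mp (by simpa using hch)
      exact ⟨this.1, this.2⟩
    have hz2 := hrun z2 List.mem_cons_self
    have hle : v + 1 ≤ C.hops := by
      simp only [List.length_cons] at hlen
      push_cast at hlen
      omega
    obtain ⟨w, hw, hwz⟩ := ((hrelz z v hz) z2 hch'.1 hz2.1).2 hz2.2 hle
    refine ih z2 w y hwz ?_ (fun a ha => hrun a (List.mem_cons_of_mem _ ha)) hch'.2 hyB hyc
    simp only [List.length_cons] at hlen
    push_cast at hlen ⊢
    omega

-- at a fixpoint (empty queue) the seen set is closed under linking, so it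
-- contains the whole component
theorem pvWalkG (C : PvCtx) (seed : Int × Int) (V : PySem.Set (Int × Int))
    (seen : PySem.Set (Int × Int)) (bb : PySem.Dict (Int × Int) Int)
    (hcore : C.core seed V [] seen bb) (hpend : C.pend V [] seen bb)
    (hdisj : ∀ x, C.cls seed x → x ∉ V) :
    ∀ x, C.cls seed x → x ∈ seen := by
  have hrelz : ∀ z v, bb.get? z = some v → C.rel seen bb z v := by
    intro z v hz
    rcases hpend.2 z v hz with hmem | hrel
    · cases hmem
    · exact hrel
  intro x hx
  induction hx with
  | refl => exact hcore.2.1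
  | @tail b c hprev hlink ih =>
    have hbV : b ∉ V := hdisj _ hprev
    have hrelb : C.rel seen bb b 0 := by
      rcases hpend.1 b ih hbV with hmem | hrel
      · cases hmem
      · exact hrel
    obtain ⟨hbB, hcB, hbc, hcc, zs, hlen, hrun, hch⟩ := hlink
    cases zs with
    | nil =>
      have hadj : pvAdj b c := by
        simpa using hch
      exact (hrelb c hadj hcB).1 hcc
    | cons z1 rest =>
      have hch' : pvAdj b z1 ∧ List.IsChain pvAdj (z1 :: (rest ++ [c])) := by
        have := List.isChain_cons_cons.mp (by simpa using hch)
        exact ⟨this.1, this.2⟩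
      have hz1 := hrun z1 List.mem_cons_self
      have h1h : (0 : Int) + 1 ≤ C.hops := by
        simp only [List.length_cons] at hlen
        push_cast at hlen
        omega
      obtain ⟨w, hw, hwz⟩ := (hrelb z1 hch'.1 hz1.1).2 hz1.2 h1h
      refine pvWalkAuxG C seen bb hrelz rest z1 w c hwz ?_
        (fun a ha => hrun a (List.mem_cons_of_mem _ ha)) hch'.2 hcB hcc
      simp only [List.length_cons] at hlen
      push_cast at hlen ⊢
      omega

-- fixpoint reading: with an empty queue, seen is exactly V plus the component and
-- the box is the component's extremes
theorem pvBfsG_base (C : PvCtx) (seed : Int × Int) (V : PySem.Set (Int × Int))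
    (seen : PySem.Set (Int × Int)) (bb : PySem.Dict (Int × Int) Int) (t l b r : Int)
    (hdisj : ∀ x, C.cls seed x → x ∉ V)
    (hcore : C.core seed V [] seen bb) (hpend : C.pend V [] seen bb)
    (hbox : pvIsExt (pvBoxSet seed V [] seen) (t, l, b, r)) :
    (∀ p, p ∈ seen ↔ (p ∈ V ∨ C.cls seed p)) ∧ pvIsExt (C.cls seed) (t, l, b, r) := by
  have hwalk := pvWalkG C seed V seen bb hcore hpend hdisj
  constructor
  · intro p
    constructor
    · intro hp
      rcases hcore.2.2.1 p hp with hV | ⟨_, _, hcls⟩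
      · exact Or.inl hV
      · exact Or.inr hcls
    · rintro (hV | hcls)
      · exact hcore.1 p hV
      · exact hwalk p hcls
  · refine pvIsExt_congr ?_ hbox
    intro p
    constructor
    · rintro (rfl | ⟨hs, hnv, _⟩)
      · exact Relation.ReflTransGen.refl
      · rcases hcore.2.2.1 p hs with hV | ⟨_, _, hcls⟩
        · exact absurd hV hnv
        · exact hcls
    · intro hcls
      exact Or.inr ⟨hwalk p hcls, hdisj p hcls, by simp⟩

theorem pvBfsG_main (C : PvCtx) (seed : Int × Int) (V : PySem.Set (Int × Int))
    (hh : 0 ≤ C.hops) (hcol0 : C.color ≠ 0)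
    (hdisj : ∀ x, C.cls seed x → x ∉ V) :
    ∀ (fuel : Nat) (q : List (Int × Int × Int)) (seen : PySem.Set (Int × Int))
      (bb : PySem.Dict (Int × Int) Int) (t l b r : Int),
    pvPhi C q seen bb ≤ fuel →
    C.core seed V q seen bb →
    C.pend V q seen bb →
    pvIsExt (pvBoxSet seed V q seen) (t, l, b, r) →
    (∀ p, p ∈ (pvBfsG C.grid C.rows C.cols C.hops C.color fuel q seen bb t l b r).1 ↔
      (p ∈ V ∨ C.cls seed p)) ∧
    pvIsExt (C.cls seed) (pvBfsG C.grid C.rows C.cols C.hops C.color fuel q seen bb t l b r).2 := by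
  intro fuel
  induction fuel with
  | zero =>
    intro q seen bb t l b r hphi hcore hpend hbox
    cases q with
    | nil => exact pvBfsG_base C seed V seen bb t l b r hdisj hcore hpend hbox
    | cons head q' =>
      exfalso
      unfold pvPhi at hphi
      simp only [List.length_cons] at hphi
      omega
  | succ fuel ih =>
    intro q seen bb t l b r hphi hcore hpend hbox
    cases q with
    | nil => exact pvBfsG_base C seed V seen bb t l b r hdisj hcore hpend hbox
    | cons head q' =>
      obtain ⟨cr, cc, consec⟩ := head
      obtain ⟨hV0, hseed0, hseen0, hq0, hbb0, hq60, hnd0⟩ := hcore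
      have hhead := hq0 _ List.mem_cons_self
      dsimp only [pvQCell] at hhead
      have hp0B : C.inB (cr, cc) := hhead.1
      have hv0 : 0 ≤ consec := by
        rcases hhead.2 with ⟨_, h2, _, _⟩ | ⟨_, h2, _, _⟩ <;> omega
      have hctx : (C.cell (cr, cc) = C.color ∧ consec = 0 ∧ C.cls seed (cr, cc)) ∨
          (C.cell (cr, cc) = 0 ∧ 1 ≤ consec ∧ consec ≤ C.hops ∧ C.pz seed (cr, cc) consec) := by
        rcases hhead.2 with ⟨h1, h2, h3, _⟩ | hz
        · exact Or.inl ⟨h1, h2, h3⟩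
        · exact Or.inr hz
      have hheadnot : ((cr, cc, consec)) ∉ q' := (List.nodup_cons.mp hnd0).1
      have hcore0 : C.core seed V q' seen bb :=
        ⟨hV0, hseed0, hseen0, fun e he => hq0 e (List.mem_cons_of_mem _ he), hbb0,
          fun e he => hq60 e (List.mem_cons_of_mem _ he), (List.nodup_cons.mp hnd0).2⟩
      -- the four relaxation steps
      have H1 := pvStepG_pres C seed V hh hcol0 (cr, cc) consec hp0B hv0 hctx
        (cr - 1, cc) (Or.inl rfl) (q', seen, bb) hcore0
      obtain ⟨hc1, ⟨e1, he1⟩, hm1, hb1, hr1, hsix1, hsev1, hprov1, hphi1⟩ := H1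
      have H2 := pvStepG_pres C seed V hh hcol0 (cr, cc) consec hp0B hv0 hctx
        (cr + 1, cc) (Or.inr (Or.inl rfl)) _ hc1
      obtain ⟨hc2, ⟨e2, he2⟩, hm2, hb2, hr2, hsix2, hsev2, hprov2, hphi2⟩ := H2
      have H3 := pvStepG_pres C seed V hh hcol0 (cr, cc) consec hp0B hv0 hctx
        (cr, cc - 1) (Or.inr (Or.inr (Or.inl rfl))) _ hc2
      obtain ⟨hc3, ⟨e3, he3⟩, hm3, hb3, hr3, hsix3, hsev3, hprov3, hphi3⟩ := H3
      have H4 := pvStepG_pres C seed V hh hcol0 (cr, cc) consec hp0B hv0 hctx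
        (cr, cc + 1) (Or.inr (Or.inr (Or.inr rfl))) _ hc3
      obtain ⟨hc4, ⟨e4, he4⟩, hm4, hb4, hr4, hsix4, hsev4, hprov4, hphi4⟩ := H4
      -- composite step facts
      set s1 := pvStepG C.grid C.rows C.cols C.hops C.color consec (q', seen, bb) (cr - 1, cc)
        with hs1
      set s2 := pvStepG C.grid C.rows C.cols C.hops C.color consec s1 (cr + 1, cc) with hs2
      set s3 := pvStepG C.grid C.rows C.cols C.hops C.color consec s2 (cr, cc - 1) with hs3
      set s4 := pvStepG C.grid C.rows C.cols C.hops C.color consec s3 (cr, cc + 1) with hs4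
      have hsub12 : ∀ x, x ∈ s1.1 → x ∈ s2.1 := fun x hx => he2 ▸ List.mem_append_left _ hx
      have hsub23 : ∀ x, x ∈ s2.1 → x ∈ s3.1 := fun x hx => he3 ▸ List.mem_append_left _ hx
      have hsub34 : ∀ x, x ∈ s3.1 → x ∈ s4.1 := fun x hx => he4 ▸ List.mem_append_left _ hx
      have hsubq4 : ∀ x, x ∈ q' → x ∈ s4.1 := fun x hx =>
        hsub34 _ (hsub23 _ (hsub12 _ (he1 ▸ List.mem_append_left _ hx)))
      have hm14 : ∀ p, p ∈ s1.2.1 → p ∈ s4.2.1 := fun p hp => hm4 _ (hm3 _ (hm2 _ hp))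
      have hm24 : ∀ p, p ∈ s2.2.1 → p ∈ s4.2.1 := fun p hp => hm4 _ (hm3 _ hp)
      have hm34 : ∀ p, p ∈ s3.2.1 → p ∈ s4.2.1 := fun p hp => hm4 _ hp
      have hm04 : ∀ p, p ∈ seen → p ∈ s4.2.1 := fun p hp => hm14 _ (hm1 _ hp)
      have hb14 : ∀ z w, s1.2.2.get? z = some w → ∃ w', w' ≤ w ∧ s4.2.2.get? z = some w' := by
        intro z w hzw
        obtain ⟨w2, hw2, h2⟩ := hb2 z w hzw
        obtain ⟨w3, hw3, h3⟩ := hb3 z w2 h2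
        obtain ⟨w4, hw4, h4⟩ := hb4 z w3 h3
        exact ⟨w4, by omega, h4⟩
      have hb24 : ∀ z w, s2.2.2.get? z = some w → ∃ w', w' ≤ w ∧ s4.2.2.get? z = some w' := by
        intro z w hzw
        obtain ⟨w3, hw3, h3⟩ := hb3 z w hzw
        obtain ⟨w4, hw4, h4⟩ := hb4 z w3 h3
        exact ⟨w4, by omega, h4⟩
      have hb04 : ∀ z w, bb.get? z = some w → ∃ w', w' ≤ w ∧ s4.2.2.get? z = some w' := by
        intro z w hzw
        obtain ⟨w1, hw1, h1⟩ := hb1 z w hzw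
        obtain ⟨w4, hw4, h4⟩ := hb14 z w1 h1
        exact ⟨w4, by omega, h4⟩
      -- the popped cell is now fully relaxed
      have hrel4 : C.rel s4.2.1 s4.2.2 (cr, cc) consec := by
        intro n hadj hnB
        rcases hadj with hn | hn | hn | hn
        · subst hn
          have := hr1 hnB
          refine ⟨fun hc => hm14 _ (this.1 hc), fun h0 hle => ?_⟩
          obtain ⟨w, hw, hg⟩ := this.2 h0 hle
          obtain ⟨w', hw', hg'⟩ := hb14 _ _ hg
          exact ⟨w', by omega, hg'⟩
        · subst hn
          have := hr2 hnB
          refine ⟨fun hc => hm24 _ (this.1 hc), fun h0 hle => ?_⟩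
          obtain ⟨w, hw, hg⟩ := this.2 h0 hle
          obtain ⟨w', hw', hg'⟩ := hb24 _ _ hg
          exact ⟨w', by omega, hg'⟩
        · subst hn
          have := hr3 hnB
          refine ⟨fun hc => hm34 _ (this.1 hc), fun h0 hle => ?_⟩
          obtain ⟨w, hw, hg⟩ := this.2 h0 hle
          obtain ⟨w', hw', hg'⟩ := hb4 _ _ hg
          exact ⟨w', by omega, hg'⟩
        · subst hn
          exact hr4 hnB
      -- queue entries of the form (p, 0) in s4 were already pending or newly seen
      have hsix04 : ∀ p : Int × Int, (p.1, p.2, (0 : Int)) ∈ s4.1 →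
          (p.1, p.2, (0 : Int)) ∈ q' ∨ p ∉ seen := by
        intro p hp
        rcases hsix4 p hp with hp3 | hns3
        · rcases hsix3 p hp3 with hp2 | hns2
          · rcases hsix2 p hp2 with hp1 | hns1
            · rcases hsix1 p hp1 with hp0 | hns0
              · exact Or.inl hp0
              · exact Or.inr hns0
            · exact Or.inr (fun hs => hns1 (hm1 _ hs))
          · exact Or.inr (fun hs => hns2 (hm2 _ (hm1 _ hs)))
        · exact Or.inr (fun hs => hns3 (hm3 _ (hm2 _ (hm1 _ hs))))
      have hsev04 : ∀ p, p ∈ s4.2.1 → p ∈ seen ∨ (p.1, p.2, (0 : Int)) ∈ s4.1 := by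
        intro p hp
        rcases hsev4 p hp with hp3 | hin
        · rcases hsev3 p hp3 with hp2 | hin
          · rcases hsev2 p hp2 with hp1 | hin
            · rcases hsev1 p hp1 with hp0 | hin
              · exact Or.inl hp0
              · exact Or.inr (hsub34 _ (hsub23 _ (hsub12 _ hin)))
            · exact Or.inr (hsub34 _ (hsub23 _ hin))
          · exact Or.inr (hsub34 _ hin)
        · exact Or.inr hin
      have hprov04 : ∀ z w, s4.2.2.get? z = some w →
          bb.get? z = some w ∨ (z.1, z.2, w) ∈ s4.1 := by
        intro z w hzw
        rcases hprov4 z w hzw with hz3 | hin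
        · rcases hprov3 z w hz3 with hz2 | hin
          · rcases hprov2 z w hz2 with hz1 | hin
            · rcases hprov1 z w hz1 with hz0 | hin
              · exact Or.inl hz0
              · exact Or.inr (hsub34 _ (hsub23 _ (hsub12 _ hin)))
            · exact Or.inr (hsub34 _ (hsub23 _ hin))
          · exact Or.inr (hsub34 _ hin)
        · exact Or.inr hin
      -- new pending obligations
      have hpend4 : C.pend V s4.1 s4.2.1 s4.2.2 := by
        constructor
        · intro p hp hnv
          rcases hsev04 p hp with hseenp | hin4
          · rcases hpend.1 p hseenp hnv with hqmem | hrel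
            · rcases List.mem_cons.mp hqmem with heH | hq'
              · have hp1 : p.1 = cr := congrArg (fun t => t.1) heH
                have hp2 : p.2 = cc := congrArg (fun t => t.2.1) heH
                have hc0 : (0 : Int) = consec := congrArg (fun t => t.2.2) heH
                have hpe : p = (cr, cc) := Prod.ext_iff.mpr ⟨hp1, hp2⟩
                right
                rw [hpe, hc0]
                exact hrel4
              · exact Or.inl (hsubq4 _ hq')
            · exact Or.inr (pvRel_mono hrel hm04 hb04)
          · exact Or.inl hin4
        · intro z v hz
          rcases hprov04 z v hz with hold | hentry
          · rcases hpend.2 z v hold with hqmem | hrel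
            · rcases List.mem_cons.mp hqmem with heH | hq'
              · have hp1 : z.1 = cr := congrArg (fun t => t.1) heH
                have hp2 : z.2 = cc := congrArg (fun t => t.2.1) heH
                have hc0 : v = consec := congrArg (fun t => t.2.2) heH
                have hpe : z = (cr, cc) := Prod.ext_iff.mpr ⟨hp1, hp2⟩
                right
                rw [hpe, hc0]
                exact hrel4
              · exact Or.inl (hsubq4 _ hq')
            · exact Or.inr (pvRel_mono hrel hm04 hb04)
          · exact Or.inl hentry
      -- fuel accounting
      have hphi_cons : pvPhi C ((cr, cc, consec) :: q') seen bb = pvPhi C q' seen bb + 1 := by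
        unfold pvPhi
        simp only [List.length_cons]
        omega
      have hphi4' : pvPhi C s4.1 s4.2.1 s4.2.2 ≤ fuel := by
        have h00 : pvPhi C (q', seen, bb).1 (q', seen, bb).2.1 (q', seen, bb).2.2
            = pvPhi C q' seen bb := rfl
        have := le_trans hphi4 (le_trans hphi3 (le_trans hphi2 hphi1))
        omega
      -- unfold one BFS round
      simp only [pvBfsG, List.foldl]
      rw [← hs1, ← hs2, ← hs3, ← hs4]
      by_cases hcc4 : pvCell C.grid cr cc = C.color
      · -- colored pop: the box absorbs (cr, cc)
        rw [if_pos hcc4, if_pos hcc4, if_pos hcc4, if_pos hcc4]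
        have hpcol : C.cell (cr, cc) = C.color ∧ consec = 0 ∧ C.cls seed (cr, cc) ∧
            (cr, cc) ∈ seen := by
          rcases hhead.2 with h | ⟨hz, _, _, _⟩
          · exact h
          · exact absurd ((hz : C.cell (cr, cc) = 0).symm.trans hcc4) (Ne.symm hcol0)
        have hbox4 : pvIsExt (pvBoxSet seed V s4.1 s4.2.1)
            (min t cr, min l cc, max b cr, max r cc) := by
          refine pvIsExt_congr ?_ (pvIsExt_insert (x := (cr, cc)) hbox)
          intro p
          constructor
          · rintro (hold | rfl)
            · rcases hold with rfl | ⟨hs, hnv, hnq⟩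
              · exact Or.inl rfl
              · refine Or.inr ⟨hm04 _ hs, hnv, ?_⟩
                intro hin
                rcases hsix04 p hin with hin' | hnse
                · exact hnq (List.mem_cons_of_mem _ hin')
                · exact hnse hs
            · refine Or.inr ⟨hm04 _ hpcol.2.2.2, hdisj _ hpcol.2.2.1, ?_⟩
              intro hin
              rcases hsix04 (cr, cc) hin with hin' | hnse
              · exact hheadnot (by rw [hpcol.2.1]; exact hin')
              · exact hnse hpcol.2.2.2
          · rintro (rfl | ⟨hs4m, hnv, hnq4⟩)
            · exact Or.inl (Or.inl rfl)
            · rcases hsev04 p hs4m with hseenp | hin4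
              · by_cases hpc : p = (cr, cc)
                · exact Or.inr hpc
                · refine Or.inl (Or.inr ⟨hseenp, hnv, ?_⟩)
                  intro hin
                  rcases List.mem_cons.mp hin with heH | hq'
                  · have hp1 : p.1 = cr := congrArg (fun t => t.1) heH
                    have hp2 : p.2 = cc := congrArg (fun t => t.2.1) heH
                    exact hpc (Prod.ext_iff.mpr ⟨hp1, hp2⟩)
                  · exact hnq4 (hsubq4 _ hq')
              · exact absurd hin4 hnq4
        exact ih s4.1 s4.2.1 s4.2.2 _ _ _ _ hphi4'
          hc4 hpend4 hbox4
      · -- blank pop: box unchanged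
        rw [if_neg hcc4, if_neg hcc4, if_neg hcc4, if_neg hcc4]
        have hpz : C.cell (cr, cc) = 0 ∧ 1 ≤ consec := by
          rcases hhead.2 with ⟨h1, _, _, _⟩ | ⟨h1, h2, _, _⟩
          · exact absurd h1 hcc4
          · exact ⟨h1, h2⟩
        have hbox4 : pvIsExt (pvBoxSet seed V s4.1 s4.2.1) (t, l, b, r) := by
          refine pvIsExt_congr ?_ hbox
          intro p
          constructor
          · rintro (rfl | ⟨hs, hnv, hnq⟩)
            · exact Or.inl rfl
            · refine Or.inr ⟨hm04 _ hs, hnv, ?_⟩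
              intro hin
              rcases hsix04 p hin with hin' | hnse
              · exact hnq (List.mem_cons_of_mem _ hin')
              · exact hnse hs
          · rintro (rfl | ⟨hs4m, hnv, hnq4⟩)
            · exact Or.inl rfl
            · rcases hsev04 p hs4m with hseenp | hin4
              · refine Or.inr ⟨hseenp, hnv, ?_⟩
                intro hin
                rcases List.mem_cons.mp hin with heH | hq'
                · have hc0 : (0 : Int) = consec := congrArg (fun t => t.2.2) heH
                  omega
                · exact hnq4 (hsubq4 _ hq')
              · exact absurd hin4 hnq4
        exact ih s4.1 s4.2.1 s4.2.2 _ _ _ _ hphi4'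
          hc4 hpend4 hbox4

-- the ghost BFS from a fresh seed: seen becomes V plus the seed's component and the
-- box becomes the component's extremes
theorem pvBfsG_char (C : PvCtx) (r c : Int) (V : PySem.Set (Int × Int))
    (hh : 0 ≤ C.hops) (hcol0 : C.color ≠ 0)
    (hseedB : C.inB (r, c)) (hseedC : C.cell (r, c) = C.color)
    (hdisj : ∀ x, C.cls (r, c) x → x ∉ V) :
    (∀ p, p ∈ (pvBfsG C.grid C.rows C.cols C.hops C.color
        (C.rows.toNat * C.cols.toNat * (C.hops.toNat + 2) + 2) [(r, c, 0)]
        (PySem.Set.add V (r, c)) PySem.Dict.empty r c r c).1 ↔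
      (p ∈ V ∨ C.cls (r, c) p)) ∧
    pvIsExt (C.cls (r, c)) (pvBfsG C.grid C.rows C.cols C.hops C.color
        (C.rows.toNat * C.cols.toNat * (C.hops.toNat + 2) + 2) [(r, c, 0)]
        (PySem.Set.add V (r, c)) PySem.Dict.empty r c r c).2 := by
  have hset : ∀ p, p ∈ PySem.Set.add V (r, c) ↔ (p ∈ V ∨ p = (r, c)) :=
    fun p => PySem.Set.mem_add V (r, c) p
  refine pvBfsG_main C (r, c) V hh hcol0 hdisj _ _ _ _ r c r c ?_ ?_ ?_ ?_
  · -- fuel bound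
    unfold pvPhi
    have hcap1 : ((pvCells C).map (fun p => if p ∈ PySem.Set.add V (r, c) then 0 else 1)).sum
        ≤ 1 * (pvCells C).length := by
      refine pvSumLe _ _ 1 ?_
      intro x hx
      split <;> omega
    have hcap2 : ((pvCells C).map (fun p =>
        match (PySem.Dict.empty : PySem.Dict (Int × Int) Int).get? p with
        | none => C.hops.toNat
        | some v => (v - 1).toNat)).sum ≤ C.hops.toNat * (pvCells C).length := by
      refine pvSumLe _ _ C.hops.toNat ?_
      intro x hx
      rw [PySem.Dict.get?_empty]
    have hlen := pvCells_len (C := C)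
    rw [hlen] at hcap1 hcap2
    have hmul : C.rows.toNat * C.cols.toNat * (C.hops.toNat + 2)
        = C.hops.toNat * (C.rows.toNat * C.cols.toNat)
          + 2 * (C.rows.toNat * C.cols.toNat) := by ring
    simp only [List.length_singleton]
    omega
  · -- initial core
    refine ⟨fun p hp => (hset p).mpr (Or.inl hp), (hset _).mpr (Or.inr rfl), ?_, ?_, ?_, ?_, ?_⟩
    · intro p hp
      rcases (hset p).mp hp with hv | rfl
      · exact Or.inl hv
      · exact Or.inr ⟨hseedB, hseedC, Relation.ReflTransGen.refl⟩
    · intro e he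
      simp only [List.mem_singleton] at he
      subst he
      exact ⟨hseedB, Or.inl ⟨hseedC, rfl, Relation.ReflTransGen.refl,
        (hset _).mpr (Or.inr rfl)⟩⟩
    · intro z v hz
      rw [PySem.Dict.get?_empty] at hz
      cases hz
    · intro e he hez
      simp only [List.mem_singleton] at he
      subst he
      exact absurd ((hez : C.cell (r, c) = 0).symm.trans hseedC) (Ne.symm hcol0)
    · exact List.nodup_singleton _
  · -- initial pending obligations
    constructor
    · intro p hp hnv
      rcases (hset p).mp hp with hv | rfl
      · exact absurd hv hnv
      · exact Or.inl (List.mem_singleton.mpr rfl)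
    · intro z v hz
      rw [PySem.Dict.get?_empty] at hz
      cases hz
  · -- initial box is the seed's own extremes
    have honly : ∀ p, pvBoxSet (r, c) V [(r, c, 0)] (PySem.Set.add V (r, c)) p ↔ p = (r, c) := by
      intro p
      constructor
      · rintro (rfl | ⟨hs, hnv, hnq⟩)
        · rfl
        · rcases (hset p).mp hs with hv | rfl
          · exact absurd hv hnv
          · exact absurd (List.mem_singleton.mpr rfl) hnq
      · rintro rfl
        exact Or.inl rfl
    refine ⟨?_, ?_, ?_, ?_, ?_⟩
    · intro p hp
      have := (honly p).mp hp
      subst this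
      simp only
      omega
    · exact ⟨(r, c), (honly _).mpr rfl, rfl⟩
    · exact ⟨(r, c), (honly _).mpr rfl, rfl⟩
    · exact ⟨(r, c), (honly _).mpr rfl, rfl⟩
    · exact ⟨(r, c), (honly _).mpr rfl, rfl⟩

-- ---------- Layer 4: characterizing B's relaxation table against the closure ----------

def PvCtx.dcore (C : PvCtx) (seed : Int × Int) (bb : PySem.Dict (Int × Int) Int) : Prop :=
  bb.keys.Nodup ∧ bb.get? seed = some 0 ∧
  (∀ p v, bb.get? p = some v → C.inB p ∧
    ((C.cell p = C.color ∧ v = 0 ∧ C.cls seed p) ∨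
     (C.cell p = 0 ∧ 1 ≤ v ∧ v ≤ C.hops ∧ C.pz seed p v)))

def PvCtx.dclosed (C : PvCtx) (bb : PySem.Dict (Int × Int) Int) : Prop :=
  ∀ p v, bb.get? p = some v → ∀ n, pvAdj p n → C.inB n →
    (C.cell n = C.color → ∃ w, bb.get? n = some w) ∧
    (C.cell n = 0 → v + 1 ≤ C.hops → ∃ w, w ≤ v + 1 ∧ bb.get? n = some w)

def pvPsi (C : PvCtx) (bb : PySem.Dict (Int × Int) Int) : Nat :=
  ((pvCells C).map (fun p => match bb.get? p with
    | none => 0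
    | some v => C.hops.toNat + 2 - v.toNat)).sum

theorem pvPsi_le (C : PvCtx) (bb : PySem.Dict (Int × Int) Int) :
    pvPsi C bb ≤ (C.hops.toNat + 2) * (C.rows.toNat * C.cols.toNat) := by
  have := pvSumLe (pvCells C) (fun p => match bb.get? p with
    | none => 0
    | some v => C.hops.toNat + 2 - v.toNat) (C.hops.toNat + 2) (by
      intro x hx
      show (match bb.get? x with
        | none => (0 : Nat)
        | some v => C.hops.toNat + 2 - v.toNat) ≤ C.hops.toNat + 2
      rcases hvx : bb.get? x with _ | v
      · exact Nat.zero_le _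
      · show C.hops.toNat + 2 - v.toNat ≤ C.hops.toNat + 2
        omega)
  rw [pvCells_len] at this
  exact this

-- one relaxation of one neighbour
theorem pvRelax_pres (C : PvCtx) (seed : Int × Int)
    (hh : 0 ≤ C.hops) (hcol0 : C.color ≠ 0)
    (p0 : Int × Int) (v0 : Int) (hp0 : C.inB p0) (hv0 : 0 ≤ v0)
    (hctx : (C.cell p0 = C.color ∧ v0 = 0 ∧ C.cls seed p0) ∨
            (C.cell p0 = 0 ∧ 1 ≤ v0 ∧ v0 ≤ C.hops ∧ C.pz seed p0 v0))
    (n : Int × Int) (hadj : pvAdj p0 n)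
    (s : PySem.Dict (Int × Int) Int × Bool)
    (hcore : C.dcore seed s.1) :
    C.dcore seed (pvRelax C.grid C.rows C.cols C.hops C.color v0 s n).1 ∧
    pvPsi C s.1 ≤ pvPsi C (pvRelax C.grid C.rows C.cols C.hops C.color v0 s n).1 ∧
    ((pvRelax C.grid C.rows C.cols C.hops C.color v0 s n).2 = true →
      s.2 = true ∨ pvPsi C s.1 + 1 ≤ pvPsi C (pvRelax C.grid C.rows C.cols C.hops C.color v0 s n).1) ∧
    ((pvRelax C.grid C.rows C.cols C.hops C.color v0 s n).2 = false →
      pvRelax C.grid C.rows C.cols C.hops C.color v0 s n = s) ∧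
    ((pvRelax C.grid C.rows C.cols C.hops C.color v0 s n).1 = s.1 → C.inB n →
      (C.cell n = C.color → ∃ w, s.1.get? n = some w) ∧
      (C.cell n = 0 → v0 + 1 ≤ C.hops → ∃ w, w ≤ v0 + 1 ∧ s.1.get? n = some w)) := by
  obtain ⟨bb, ch⟩ := s
  obtain ⟨hnd, hsv, hent⟩ := hcore
  dsimp only at hnd hsv hent ⊢
  by_cases hB : 0 ≤ n.1 ∧ n.1 < C.rows ∧ 0 ≤ n.2 ∧ n.2 < C.cols
  case neg =>
    have hstep : pvRelax C.grid C.rows C.cols C.hops C.color v0 (bb, ch) n = (bb, ch) := by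
      simp only [pvRelax]
      rw [if_neg hB]
    rw [hstep]
    dsimp only
    exact ⟨⟨hnd, hsv, hent⟩, le_refl _, fun h => Or.inl h, fun _ => rfl,
      fun _ hnB => absurd hnB hB⟩
  case pos =>
  have hnB : C.inB n := hB
  have hncells : n ∈ pvCells C := pvCells_mem.mpr hnB
  -- the new value about to be proposed, if any
  by_cases hcolr : pvCell C.grid n.1 n.2 = C.color
  · -- proposes 0
    have hccol : C.cell n = C.color := hcolr
    have hclsn : C.cls seed n := pvCls_step_color hh hp0 hctx hadj hnB hccol
    cases hbbn : bb.get? n with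
    | none =>
      have hstep : pvRelax C.grid C.rows C.cols C.hops C.color v0 (bb, ch) n
          = (bb.insert n 0, true) := by
        simp only [pvRelax]
        rw [if_pos hB, if_pos hcolr]
        dsimp only
        rw [hbbn]
      rw [hstep]
      dsimp only
      have hnewnd : (bb.insert n 0).keys.Nodup := PySem.Dict.nodup_keys_insert _ _ _ hnd
      have hpsi : pvPsi C bb + 1 ≤ pvPsi C (bb.insert n 0) := by
        unfold pvPsi
        refine pvSumDrop (pvCells C) _ _ n ?_ hncells ?_
        · intro x hx
          by_cases hxn : x = n
          · subst hxn
            rw [hbbn, PySem.Dict.get?_insert, if_pos rfl]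
            show (0 : Nat) ≤ C.hops.toNat + 2 - (0 : Int).toNat
            omega
          · rw [PySem.Dict.get?_insert, if_neg hxn]
        · rw [hbbn, PySem.Dict.get?_insert, if_pos rfl]
          show (0 : Nat) + 1 ≤ C.hops.toNat + 2 - (0 : Int).toNat
          omega
      refine ⟨⟨hnewnd, ?_, ?_⟩, by omega, fun _ => Or.inr hpsi, ?_, ?_⟩
      · rw [PySem.Dict.get?_insert]
        split
        · rfl
        · exact hsv
      · intro p v hp
        by_cases hpn : p = n
        · subst hpn
          rw [PySem.Dict.get?_insert, if_pos rfl] at hp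
          cases hp
          exact ⟨hnB, Or.inl ⟨hccol, rfl, hclsn⟩⟩
        · rw [PySem.Dict.get?_insert, if_neg hpn] at hp
          exact hent p v hp
      · intro hfalse
        cases hfalse
      · intro heq
        exfalso
        have := congrArg (fun d => d.get? n) heq
        simp only [PySem.Dict.get?_insert, if_pos rfl] at this
        rw [hbbn] at this
        cases this
    | some old =>
      by_cases himp : (0 : Int) < old
      · have hstep : pvRelax C.grid C.rows C.cols C.hops C.color v0 (bb, ch) n
            = (bb.insert n 0, true) := by
          simp only [pvRelax]
          rw [if_pos hB, if_pos hcolr]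
          dsimp only
          rw [hbbn]
          dsimp only
          rw [if_pos himp]
        rw [hstep]
        dsimp only
        have hnewnd : (bb.insert n 0).keys.Nodup := PySem.Dict.nodup_keys_insert _ _ _ hnd
        have hpsi : pvPsi C bb + 1 ≤ pvPsi C (bb.insert n 0) := by
          unfold pvPsi
          refine pvSumDrop (pvCells C) _ _ n ?_ hncells ?_
          · intro x hx
            by_cases hxn : x = n
            · subst hxn
              rw [hbbn, PySem.Dict.get?_insert, if_pos rfl]
              show C.hops.toNat + 2 - old.toNat ≤ C.hops.toNat + 2 - (0 : Int).toNat
              omega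
            · rw [PySem.Dict.get?_insert, if_neg hxn]
          · rw [hbbn, PySem.Dict.get?_insert, if_pos rfl]
            show C.hops.toNat + 2 - old.toNat + 1 ≤ C.hops.toNat + 2 - (0 : Int).toNat
            have hole := hent n old hbbn
            have : old ≤ C.hops := by
              rcases hole.2 with ⟨_, h, _⟩ | ⟨_, _, h, _⟩ <;> omega
            omega
        refine ⟨⟨hnewnd, ?_, ?_⟩, by omega, fun _ => Or.inr hpsi, ?_, ?_⟩
        · rw [PySem.Dict.get?_insert]
          split
          · rfl
          · exact hsv
        · intro p v hp
          by_cases hpn : p = n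
          · subst hpn
            rw [PySem.Dict.get?_insert, if_pos rfl] at hp
            cases hp
            exact ⟨hnB, Or.inl ⟨hccol, rfl, hclsn⟩⟩
          · rw [PySem.Dict.get?_insert, if_neg hpn] at hp
            exact hent p v hp
        · intro hfalse
          cases hfalse
        · intro heq
          exfalso
          have := congrArg (fun d => d.get? n) heq
          simp only [PySem.Dict.get?_insert, if_pos rfl] at this
          rw [hbbn] at this
          cases this
          omega
      · have hstep : pvRelax C.grid C.rows C.cols C.hops C.color v0 (bb, ch) n
            = (bb, ch) := by
          simp only [pvRelax]
          rw [if_pos hB, if_pos hcolr]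
          dsimp only
          rw [hbbn]
          dsimp only
          rw [if_neg himp]
        rw [hstep]
        dsimp only
        exact ⟨⟨hnd, hsv, hent⟩, le_refl _, fun h => Or.inl h, fun _ => rfl,
          fun _ _ => ⟨fun _ => ⟨old, rfl⟩, fun h0 _ => absurd (h0.symm.trans hccol) (Ne.symm hcol0)⟩⟩
  · by_cases hz : pvCell C.grid n.1 n.2 = 0 ∧ v0 < C.hops
    · have hcz : C.cell n = 0 := hz.1
      have hpzn : C.pz seed n (v0 + 1) := pvPz_step hp0 hctx hadj hnB hcz
      cases hbbn : bb.get? n with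
      | none =>
        have hstep : pvRelax C.grid C.rows C.cols C.hops C.color v0 (bb, ch) n
            = (bb.insert n (v0 + 1), true) := by
          simp only [pvRelax]
          rw [if_pos hB, if_neg hcolr, if_pos hz]
          dsimp only
          rw [hbbn]
        rw [hstep]
        dsimp only
        have hnewnd : (bb.insert n (v0 + 1)).keys.Nodup := PySem.Dict.nodup_keys_insert _ _ _ hnd
        have hpsi : pvPsi C bb + 1 ≤ pvPsi C (bb.insert n (v0 + 1)) := by
          unfold pvPsi
          refine pvSumDrop (pvCells C) _ _ n ?_ hncells ?_
          · intro x hx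
            by_cases hxn : x = n
            · subst hxn
              rw [hbbn, PySem.Dict.get?_insert, if_pos rfl]
              show (0 : Nat) ≤ C.hops.toNat + 2 - (v0 + 1).toNat
              omega
            · rw [PySem.Dict.get?_insert, if_neg hxn]
          · rw [hbbn, PySem.Dict.get?_insert, if_pos rfl]
            show (0 : Nat) + 1 ≤ C.hops.toNat + 2 - (v0 + 1).toNat
            omega
        refine ⟨⟨hnewnd, ?_, ?_⟩, by omega, fun _ => Or.inr hpsi, ?_, ?_⟩
        · rw [PySem.Dict.get?_insert]
          split
          · next hns =>
            exfalso
            rw [hns] at hsv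
            rw [hsv] at hbbn
            cases hbbn
          · exact hsv
        · intro p v hp
          by_cases hpn : p = n
          · subst hpn
            rw [PySem.Dict.get?_insert, if_pos rfl] at hp
            cases hp
            exact ⟨hnB, Or.inr ⟨hcz, by omega, by omega, hpzn⟩⟩
          · rw [PySem.Dict.get?_insert, if_neg hpn] at hp
            exact hent p v hp
        · intro hfalse
          cases hfalse
        · intro heq
          exfalso
          have := congrArg (fun d => d.get? n) heq
          simp only [PySem.Dict.get?_insert, if_pos rfl] at this
          rw [hbbn] at this
          cases this
      | some old =>
        by_cases himp : v0 + 1 < old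
        · have hstep : pvRelax C.grid C.rows C.cols C.hops C.color v0 (bb, ch) n
              = (bb.insert n (v0 + 1), true) := by
            simp only [pvRelax]
            rw [if_pos hB, if_neg hcolr, if_pos hz]
            dsimp only
            rw [hbbn]
            dsimp only
            rw [if_pos himp]
          rw [hstep]
          dsimp only
          have hnewnd : (bb.insert n (v0 + 1)).keys.Nodup := PySem.Dict.nodup_keys_insert _ _ _ hnd
          have hpsi : pvPsi C bb + 1 ≤ pvPsi C (bb.insert n (v0 + 1)) := by
            unfold pvPsi
            refine pvSumDrop (pvCells C) _ _ n ?_ hncells ?_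
            · intro x hx
              by_cases hxn : x = n
              · subst hxn
                rw [hbbn, PySem.Dict.get?_insert, if_pos rfl]
                show C.hops.toNat + 2 - old.toNat ≤ C.hops.toNat + 2 - (v0 + 1).toNat
                omega
              · rw [PySem.Dict.get?_insert, if_neg hxn]
            · rw [hbbn, PySem.Dict.get?_insert, if_pos rfl]
              show C.hops.toNat + 2 - old.toNat + 1 ≤ C.hops.toNat + 2 - (v0 + 1).toNat
              have hole := hent n old hbbn
              have : old ≤ C.hops := by
                rcases hole.2 with ⟨_, h, _⟩ | ⟨_, _, h, _⟩ <;> omega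
              omega
          refine ⟨⟨hnewnd, ?_, ?_⟩, by omega, fun _ => Or.inr hpsi, ?_, ?_⟩
          · rw [PySem.Dict.get?_insert]
            split
            · next hns =>
              exfalso
              rw [hns] at hsv
              rw [hsv] at hbbn
              cases hbbn
              omega
            · exact hsv
          · intro p v hp
            by_cases hpn : p = n
            · subst hpn
              rw [PySem.Dict.get?_insert, if_pos rfl] at hp
              cases hp
              exact ⟨hnB, Or.inr ⟨hcz, by omega, by omega, hpzn⟩⟩
            · rw [PySem.Dict.get?_insert, if_neg hpn] at hp
              exact hent p v hp
          · intro hfalse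
            cases hfalse
          · intro heq
            exfalso
            have := congrArg (fun d => d.get? n) heq
            simp only [PySem.Dict.get?_insert, if_pos rfl] at this
            rw [hbbn] at this
            cases this
            omega
        · have hstep : pvRelax C.grid C.rows C.cols C.hops C.color v0 (bb, ch) n
              = (bb, ch) := by
            simp only [pvRelax]
            rw [if_pos hB, if_neg hcolr, if_pos hz]
            dsimp only
            rw [hbbn]
            dsimp only
            rw [if_neg himp]
          rw [hstep]
          dsimp only
          exact ⟨⟨hnd, hsv, hent⟩, le_refl _, fun h => Or.inl h, fun _ => rfl,
            fun _ _ => ⟨fun hcc => absurd hcc hcolr,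
              fun _ _ => ⟨old, by omega, rfl⟩⟩⟩
    · have hstep : pvRelax C.grid C.rows C.cols C.hops C.color v0 (bb, ch) n
          = (bb, ch) := by
        simp only [pvRelax]
        rw [if_pos hB, if_neg hcolr, if_neg hz]
      rw [hstep]
      dsimp only
      exact ⟨⟨hnd, hsv, hent⟩, le_refl _, fun h => Or.inl h, fun _ => rfl,
        fun _ _ => ⟨fun hcc => absurd hcc hcolr,
          fun h0 hle => absurd (show pvCell C.grid n.1 n.2 = 0 ∧ v0 < C.hops from
            ⟨h0, by omega⟩) hz⟩⟩

theorem pvFoldPred {α β : Type} (P : β → Prop) (f : β → α → β) (l : List α)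
    (h : ∀ x ∈ l, ∀ s, P s → P (f s x)) : ∀ s, P s → P (l.foldl f s) := by
  induction l with
  | nil => intro s hs; exact hs
  | cons x xs ih =>
    intro s hs
    exact ih (fun y hy s' hs' => h y (List.mem_cons_of_mem _ hy) s' hs') _
      (h x List.mem_cons_self s hs)

theorem pvFoldFix {α β : Type} (f : β → α → β) (l : List α) (flag : β → Bool)
    (hstep : ∀ s x, flag (f s x) = false → f s x = s) :
    ∀ s0, flag (l.foldl f s0) = false → l.foldl f s0 = s0 ∧ ∀ x ∈ l, f s0 x = s0 := by
  induction l with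
  | nil => intro s0 _; exact ⟨rfl, fun x hx => absurd hx (List.not_mem_nil)⟩
  | cons x xs ih =>
    intro s0 hres
    simp only [List.foldl_cons] at hres ⊢
    obtain ⟨h1, h2⟩ := ih (f s0 x) hres
    have hflag : flag (f s0 x) = false := by rw [← h1]; exact hres
    have hfx : f s0 x = s0 := hstep s0 x hflag
    constructor
    · rw [h1, hfx]
    · intro y hy
      rcases List.mem_cons.mp hy with rfl | hy'
      · exact hfx
      · rw [hfx] at h2
        exact h2 y hy'

theorem pvRelax_cases (grid : List (List Int)) (rows cols hops color consec : Int)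
    (s : PySem.Dict (Int × Int) Int × Bool) (n : Int × Int) :
    pvRelax grid rows cols hops color consec s n = s ∨
    (pvRelax grid rows cols hops color consec s n).2 = true := by
  by_cases hB : 0 ≤ n.1 ∧ n.1 < rows ∧ 0 ≤ n.2 ∧ n.2 < cols
  case neg =>
    left
    simp only [pvRelax]
    rw [if_neg hB]
  case pos =>
    simp only [pvRelax]
    rw [if_pos hB]
    by_cases hc : pvCell grid n.1 n.2 = color
    · rw [if_pos hc]
      dsimp only
      cases hg : s.1.get? n with
      | none => right; rfl
      | some old =>
        dsimp only
        by_cases hlt : (0 : Int) < old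
        · rw [if_pos hlt]
          right
          rfl
        · rw [if_neg hlt]
          left
          rfl
    · rw [if_neg hc]
      by_cases hz : pvCell grid n.1 n.2 = 0 ∧ consec < hops
      · rw [if_pos hz]
        dsimp only
        cases hg : s.1.get? n with
        | none => right; rfl
        | some old =>
          dsimp only
          by_cases hlt : consec + 1 < old
          · rw [if_pos hlt]
            right
            rfl
          · rw [if_neg hlt]
            left
            rfl
      · rw [if_neg hz]
        left
        rfl

theorem pvRelax_flag (grid : List (List Int)) (rows cols hops color consec : Int)
    (s : PySem.Dict (Int × Int) Int × Bool) (n : Int × Int)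
    (h : (pvRelax grid rows cols hops color consec s n).2 = false) :
    pvRelax grid rows cols hops color consec s n = s := by
  rcases pvRelax_cases grid rows cols hops color consec s n with he | ht
  · exact he
  · rw [ht] at h
    cases h

-- one pass preserves the invariant and grows the potential when it reports a change
set_option maxHeartbeats 1000000 in
theorem pvPass_pres (C : PvCtx) (seed : Int × Int)
    (hh : 0 ≤ C.hops) (hcol0 : C.color ≠ 0)
    (bb0 : PySem.Dict (Int × Int) Int) (hcore : C.dcore seed bb0) :
    C.dcore seed (pvPass C.grid C.rows C.cols C.hops C.color bb0).1 ∧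
    pvPsi C bb0 ≤ pvPsi C (pvPass C.grid C.rows C.cols C.hops C.color bb0).1 ∧
    ((pvPass C.grid C.rows C.cols C.hops C.color bb0).2 = true →
      pvPsi C bb0 + 1 ≤ pvPsi C (pvPass C.grid C.rows C.cols C.hops C.color bb0).1) := by
  have hbody : ∀ pv ∈ bb0.items, ∀ s : PySem.Dict (Int × Int) Int × Bool,
      (C.dcore seed s.1 ∧ pvPsi C bb0 ≤ pvPsi C s.1 ∧
        (s.2 = true → pvPsi C bb0 + 1 ≤ pvPsi C s.1)) →
      (C.dcore seed ([(pv.1.1 - 1, pv.1.2), (pv.1.1 + 1, pv.1.2), (pv.1.1, pv.1.2 - 1),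
          (pv.1.1, pv.1.2 + 1)].foldl (pvRelax C.grid C.rows C.cols C.hops C.color pv.2) s).1 ∧
        pvPsi C bb0 ≤ pvPsi C (([(pv.1.1 - 1, pv.1.2), (pv.1.1 + 1, pv.1.2), (pv.1.1, pv.1.2 - 1),
          (pv.1.1, pv.1.2 + 1)].foldl (pvRelax C.grid C.rows C.cols C.hops C.color pv.2) s)).1 ∧
        ((([(pv.1.1 - 1, pv.1.2), (pv.1.1 + 1, pv.1.2), (pv.1.1, pv.1.2 - 1),
          (pv.1.1, pv.1.2 + 1)].foldl (pvRelax C.grid C.rows C.cols C.hops C.color pv.2) s)).2 = true →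
          pvPsi C bb0 + 1 ≤ pvPsi C (([(pv.1.1 - 1, pv.1.2), (pv.1.1 + 1, pv.1.2), (pv.1.1, pv.1.2 - 1),
          (pv.1.1, pv.1.2 + 1)].foldl (pvRelax C.grid C.rows C.cols C.hops C.color pv.2) s)).1)) := by
    intro pv hpv s hs
    have hget : bb0.get? pv.1 = some pv.2 := by
      rw [PySem.Dict.get?_eq_some_iff_mem_items _ _ _ hcore.1]
      exact hpv
    obtain ⟨hpB, hcase⟩ := hcore.2.2 pv.1 pv.2 hget
    have hv0 : 0 ≤ pv.2 := by
      rcases hcase with ⟨_, h2, _⟩ | ⟨_, h2, _, _⟩ <;> omega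
    refine pvFoldPred (fun s' : PySem.Dict (Int × Int) Int × Bool =>
        C.dcore seed s'.1 ∧ pvPsi C bb0 ≤ pvPsi C s'.1 ∧
        (s'.2 = true → pvPsi C bb0 + 1 ≤ pvPsi C s'.1))
      (pvRelax C.grid C.rows C.cols C.hops C.color pv.2) _ ?_ s hs
    intro n hn s' hs'
    have hadj : pvAdj pv.1 n := by
      simp only [List.mem_cons] at hn
      rcases hn with rfl | rfl | rfl | rfl | h
      · exact Or.inl rfl
      · exact Or.inr (Or.inl rfl)
      · exact Or.inr (Or.inr (Or.inl rfl))
      · exact Or.inr (Or.inr (Or.inr rfl))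
      · cases h
    have H := pvRelax_pres C seed hh hcol0 pv.1 pv.2 hpB hv0 hcase n hadj s' hs'.1
    refine ⟨H.1, le_trans hs'.2.1 H.2.1, ?_⟩
    intro hflag
    rcases H.2.2.1 hflag with hold | hstrict
    · exact le_trans (hs'.2.2 hold) H.2.1
    · omega
  have hmain := pvFoldPred
    (fun s : PySem.Dict (Int × Int) Int × Bool =>
      C.dcore seed s.1 ∧ pvPsi C bb0 ≤ pvPsi C s.1 ∧
      (s.2 = true → pvPsi C bb0 + 1 ≤ pvPsi C s.1))
    (fun s pv =>
      [(pv.1.1 - 1, pv.1.2), (pv.1.1 + 1, pv.1.2), (pv.1.1, pv.1.2 - 1), (pv.1.1, pv.1.2 + 1)].foldl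
        (pvRelax C.grid C.rows C.cols C.hops C.color pv.2) s)
    bb0.items hbody (bb0, false) ⟨hcore, le_refl _, fun h => nomatch h⟩
  exact hmain
-- an unchanged pass means the table is closed under relaxation
set_option maxHeartbeats 1000000 in
theorem pvPass_fix (C : PvCtx) (seed : Int × Int)
    (hh : 0 ≤ C.hops) (hcol0 : C.color ≠ 0)
    (bb0 : PySem.Dict (Int × Int) Int) (hcore : C.dcore seed bb0)
    (hflag : (pvPass C.grid C.rows C.cols C.hops C.color bb0).2 = false) :
    (pvPass C.grid C.rows C.cols C.hops C.color bb0).1 = bb0 ∧ C.dclosed bb0 := by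
  have hP : pvPass C.grid C.rows C.cols C.hops C.color bb0
      = bb0.items.foldl (fun s pv =>
        [(pv.1.1 - 1, pv.1.2), (pv.1.1 + 1, pv.1.2), (pv.1.1, pv.1.2 - 1), (pv.1.1, pv.1.2 + 1)].foldl
          (pvRelax C.grid C.rows C.cols C.hops C.color pv.2) s) (bb0, false) := rfl
  have hinnerfix : ∀ (s : PySem.Dict (Int × Int) Int × Bool) (pv : (Int × Int) × Int),
      ((fun s pv =>
        [(pv.1.1 - 1, pv.1.2), (pv.1.1 + 1, pv.1.2), (pv.1.1, pv.1.2 - 1), (pv.1.1, pv.1.2 + 1)].foldl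
          (pvRelax C.grid C.rows C.cols C.hops C.color pv.2) s) s pv).2 = false →
      (fun s pv =>
        [(pv.1.1 - 1, pv.1.2), (pv.1.1 + 1, pv.1.2), (pv.1.1, pv.1.2 - 1), (pv.1.1, pv.1.2 + 1)].foldl
          (pvRelax C.grid C.rows C.cols C.hops C.color pv.2) s) s pv = s := by
    intro s pv hf
    exact (pvFoldFix _ _ (fun t => t.2)
      (fun t n ht => pvRelax_flag _ _ _ _ _ _ t n ht) s hf).1
  have houter := pvFoldFix _ bb0.items (fun t => t.2) hinnerfix (bb0, false)
    (by rw [← hP]; exact hflag)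
  have hfix1 : (pvPass C.grid C.rows C.cols C.hops C.color bb0).1 = bb0 := by
    rw [hP, houter.1]
  refine ⟨hfix1, ?_⟩
  intro p v hget n hadj hnB
  have hitem : (p, v) ∈ bb0.items := by
    rw [← PySem.Dict.get?_eq_some_iff_mem_items _ _ _ hcore.1]
    exact hget
  have hpvfix := houter.2 (p, v) hitem
  have hrelfix := (pvFoldFix _ _ (fun t => t.2)
    (fun t m ht => pvRelax_flag _ _ _ _ _ _ t m ht) (bb0, false)
    (by rw [hpvfix])).2
  have hnmem : n ∈ [(p.1 - 1, p.2), (p.1 + 1, p.2), (p.1, p.2 - 1), (p.1, p.2 + 1)] := by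
    rcases hadj with rfl | rfl | rfl | rfl
    · exact List.mem_cons_self
    · exact List.mem_cons_of_mem _ List.mem_cons_self
    · exact List.mem_cons_of_mem _ (List.mem_cons_of_mem _ List.mem_cons_self)
    · exact List.mem_cons_of_mem _ (List.mem_cons_of_mem _ (List.mem_cons_of_mem _ List.mem_cons_self))
  have hnfix := hrelfix n hnmem
  obtain ⟨hpB, hcase⟩ := hcore.2.2 p v hget
  have hv0 : 0 ≤ v := by
    rcases hcase with ⟨_, h2, _⟩ | ⟨_, h2, _, _⟩ <;> omega
  have H := pvRelax_pres C seed hh hcol0 p v hpB hv0 hcase n hadj (bb0, false) hcore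
  exact H.2.2.2.2 (by rw [hnfix]) hnB

theorem pvDpLoop_char (C : PvCtx) (seed : Int × Int)
    (hh : 0 ≤ C.hops) (hcol0 : C.color ≠ 0) :
    ∀ (fuel : Nat) (bb : PySem.Dict (Int × Int) Int), C.dcore seed bb →
    (C.hops.toNat + 2) * (C.rows.toNat * C.cols.toNat) + 1 ≤ fuel + pvPsi C bb →
    C.dcore seed (pvDpLoop C.grid C.rows C.cols C.hops C.color fuel bb) ∧
    C.dclosed (pvDpLoop C.grid C.rows C.cols C.hops C.color fuel bb) := by
  intro fuel
  induction fuel with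
  | zero =>
    intro bb hcore hfuel
    exfalso
    have := pvPsi_le C bb
    omega
  | succ fuel ih =>
    intro bb hcore hfuel
    have hpres := pvPass_pres C seed hh hcol0 bb hcore
    cases hfl : (pvPass C.grid C.rows C.cols C.hops C.color bb).2 with
    | false =>
      have hfix := pvPass_fix C seed hh hcol0 bb hcore hfl
      have hres : pvDpLoop C.grid C.rows C.cols C.hops C.color (fuel + 1) bb = bb := by
        simp only [pvDpLoop]
        rw [hfl]
        simp only [Bool.false_eq_true, if_false]
        exact hfix.1
      rw [hres]
      exact ⟨hcore, hfix.2⟩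
    | true =>
      have hres : pvDpLoop C.grid C.rows C.cols C.hops C.color (fuel + 1) bb
          = pvDpLoop C.grid C.rows C.cols C.hops C.color fuel
            (pvPass C.grid C.rows C.cols C.hops C.color bb).1 := by
        simp only [pvDpLoop]
        rw [hfl]
        simp
      rw [hres]
      exact ih _ hpres.1 (by have := hpres.2.2 hfl; omega)

-- walking a blank run through a closed table
theorem pvWalkAuxD (C : PvCtx) (seed : Int × Int) (bb : PySem.Dict (Int × Int) Int)
    (hcl : C.dclosed bb) :
    ∀ (rest : List (Int × Int)) (z : Int × Int) (v : Int) (y : Int × Int),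
      bb.get? z = some v → (v + (rest.length : Int)) ≤ C.hops → C.zrun rest →
      List.IsChain pvAdj (z :: (rest ++ [y])) → C.inB y → C.cell y = C.color →
      ∃ w, bb.get? y = some w := by
  intro rest
  induction rest with
  | nil =>
    intro z v y hz hlen hrun hch hyB hyc
    have hadj : pvAdj z y := by simpa using hch
    exact (hcl z v hz y hadj hyB).1 hyc
  | cons z2 rest' ih =>
    intro z v y hz hlen hrun hch hyB hyc
    have hch' : pvAdj z z2 ∧ List.IsChain pvAdj (z2 :: (rest' ++ [y])) := by
      have := List.isChain_cons_cons.mp (by simpa using hch)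
      exact ⟨this.1, this.2⟩
    have hz2 := hrun z2 List.mem_cons_self
    have hle : v + 1 ≤ C.hops := by
      simp only [List.length_cons] at hlen
      push_cast at hlen
      omega
    obtain ⟨w, hw, hwz⟩ := (hcl z v hz z2 hch'.1 hz2.1).2 hz2.2 hle
    refine ih z2 w y hwz ?_ (fun a ha => hrun a (List.mem_cons_of_mem _ ha)) hch'.2 hyB hyc
    simp only [List.length_cons] at hlen
    push_cast at hlen ⊢
    omega


-- the whole component ends up in a closed sound table, with value 0
theorem pvWalkD (C : PvCtx) (seed : Int × Int) (hcol0 : C.color ≠ 0)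
    (bb : PySem.Dict (Int × Int) Int)
    (hcore : C.dcore seed bb) (hcl : C.dclosed bb) :
    ∀ x, C.cls seed x → bb.get? x = some 0 := by
  have hval : ∀ x w, bb.get? x = some w → C.cell x = C.color → bb.get? x = some 0 := by
    intro x w hx hxc
    rcases (hcore.2.2 x w hx).2 with ⟨_, hv, _⟩ | ⟨hz, _, _⟩
    · rw [hx, hv]
    · exact absurd (hz.symm.trans hxc) (Ne.symm hcol0)
  intro x hx
  induction hx with
  | refl => exact hcore.2.1
  | @tail b c hprev hlink ih =>
    obtain ⟨hbB, hcB, hbc, hcc, zs, hlen, hrun, hch⟩ := hlink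
    cases zs with
    | nil =>
      have hadj : pvAdj b c := by simpa using hch
      obtain ⟨w, hw⟩ := (hcl b 0 ih c hadj hcB).1 hcc
      exact hval c w hw hcc
    | cons z1 rest =>
      have hch' : pvAdj b z1 ∧ List.IsChain pvAdj (z1 :: (rest ++ [c])) := by
        have := List.isChain_cons_cons.mp (by simpa using hch)
        exact ⟨this.1, this.2⟩
      have hz1 := hrun z1 List.mem_cons_self
      have h1h : (0 : Int) + 1 ≤ C.hops := by
        simp only [List.length_cons] at hlen
        push_cast at hlen
        omega
      obtain ⟨w, hw, hwz⟩ := (hcl b 0 ih z1 hch'.1 hz1.1).2 hz1.2 h1h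
      obtain ⟨w2, hw2⟩ := pvWalkAuxD C seed bb hcl rest z1 w c hwz
        (by
          simp only [List.length_cons] at hlen
          push_cast at hlen ⊢
          omega)
        (fun a ha => hrun a (List.mem_cons_of_mem _ ha)) hch'.2 hcB hcc
      exact hval c w2 hw2 hcc

-- a membership-exact cell list gives the extremes via min/max
theorem pvBoxOfComp (S : (Int × Int) → Prop) (comp : List (Int × Int))
    (hcomp : ∀ p, p ∈ comp ↔ S p) (x0 : Int × Int) (hx0 : x0 ∈ comp) :
    pvIsExt S ((PySem.List.min? (comp.map (fun p => p.1)) (fun x => x)).getD 0,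
               (PySem.List.min? (comp.map (fun p => p.2)) (fun x => x)).getD 0,
               (PySem.List.max? (comp.map (fun p => p.1)) (fun x => x)).getD 0,
               (PySem.List.max? (comp.map (fun p => p.2)) (fun x => x)).getD 0) := by
  cases hm1 : PySem.List.min? (comp.map (fun p => p.1)) (fun x => x) with
  | none =>
    exfalso
    have := (PySem.List.min?_eq_none_iff _ _).mp hm1
    rw [List.map_eq_nil_iff] at this
    rw [this] at hx0
    cases hx0
  | some m1 =>
  cases hm2 : PySem.List.min? (comp.map (fun p => p.2)) (fun x => x) with
  | none =>
    exfalso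
    have := (PySem.List.min?_eq_none_iff _ _).mp hm2
    rw [List.map_eq_nil_iff] at this
    rw [this] at hx0
    cases hx0
  | some m2 =>
  cases hm3 : PySem.List.max? (comp.map (fun p => p.1)) (fun x => x) with
  | none =>
    exfalso
    have := (PySem.List.max?_eq_none_iff _ _).mp hm3
    rw [List.map_eq_nil_iff] at this
    rw [this] at hx0
    cases hx0
  | some m3 =>
  cases hm4 : PySem.List.max? (comp.map (fun p => p.2)) (fun x => x) with
  | none =>
    exfalso
    have := (PySem.List.max?_eq_none_iff _ _).mp hm4
    rw [List.map_eq_nil_iff] at this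
    rw [this] at hx0
    cases hx0
  | some m4 =>
  simp only [Option.getD_some]
  constructor
  · intro p hp
    have hpc : p ∈ comp := (hcomp p).mpr hp
    refine ⟨PySem.List.min?_isMin hm1 p.1 (List.mem_map_of_mem hpc),
      PySem.List.min?_isMin hm2 p.2 (List.mem_map_of_mem hpc),
      PySem.List.max?_isMax hm3 p.1 (List.mem_map_of_mem hpc),
      PySem.List.max?_isMax hm4 p.2 (List.mem_map_of_mem hpc)⟩
  · refine ⟨?_, ?_, ?_, ?_⟩
    · obtain ⟨p, hp, hp1⟩ := List.mem_map.mp (PySem.List.min?_mem hm1)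
      exact ⟨p, (hcomp p).mp hp, hp1⟩
    · obtain ⟨p, hp, hp1⟩ := List.mem_map.mp (PySem.List.min?_mem hm2)
      exact ⟨p, (hcomp p).mp hp, hp1⟩
    · obtain ⟨p, hp, hp1⟩ := List.mem_map.mp (PySem.List.max?_mem hm3)
      exact ⟨p, (hcomp p).mp hp, hp1⟩
    · obtain ⟨p, hp, hp1⟩ := List.mem_map.mp (PySem.List.max?_mem hm4)
      exact ⟨p, (hcomp p).mp hp, hp1⟩

-- B's relaxation loop from a fresh seed computes exactly the component
theorem pvDp_char (C : PvCtx) (r c : Int)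
    (hh : 0 ≤ C.hops) (hcol0 : C.color ≠ 0)
    (hseedB : C.inB (r, c)) (hseedC : C.cell (r, c) = C.color) :
    ∀ p, p ∈ (pvDpLoop C.grid C.rows C.cols C.hops C.color
        ((C.hops.toNat + 2) * (C.rows.toNat * C.cols.toNat) + 2)
        (PySem.Dict.empty.insert (r, c) 0)).keys.filter
          (fun q => pvCell C.grid q.1 q.2 == C.color) ↔ C.cls (r, c) p := by
  have hinit : C.dcore (r, c) (PySem.Dict.empty.insert (r, c) 0) := by
    refine ⟨PySem.Dict.nodup_keys_insert _ _ _ (by simp [PySem.Dict.keys, PySem.Dict.empty]), ?_, ?_⟩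
    · rw [PySem.Dict.get?_insert, if_pos rfl]
    · intro p v hp
      by_cases hpn : p = (r, c)
      · subst hpn
        rw [PySem.Dict.get?_insert, if_pos rfl] at hp
        cases hp
        exact ⟨hseedB, Or.inl ⟨hseedC, rfl, Relation.ReflTransGen.refl⟩⟩
      · rw [PySem.Dict.get?_insert, if_neg hpn, PySem.Dict.get?_empty] at hp
        cases hp
  have hloop := pvDpLoop_char C (r, c) hh hcol0
    ((C.hops.toNat + 2) * (C.rows.toNat * C.cols.toNat) + 2)
    (PySem.Dict.empty.insert (r, c) 0) hinit (by omega)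
  set best := pvDpLoop C.grid C.rows C.cols C.hops C.color
    ((C.hops.toNat + 2) * (C.rows.toNat * C.cols.toNat) + 2)
    (PySem.Dict.empty.insert (r, c) 0) with hbest
  intro p
  rw [List.mem_filter]
  constructor
  · rintro ⟨hk, hcol⟩
    have hcolp : C.cell p = C.color := by simpa using hcol
    have hsome : best.get? p ≠ none := fun hn =>
      ((PySem.Dict.get?_eq_none_iff_not_mem_keys _ _).mp hn) hk
    cases hg : best.get? p with
    | none => exact absurd hg hsome
    | some v =>
      rcases (hloop.1.2.2 p v hg).2 with ⟨_, _, hcls⟩ | ⟨hz, _, _⟩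
      · exact hcls
      · exact absurd (hz.symm.trans hcolp) (Ne.symm hcol0)
  · intro hcls
    have hget := pvWalkD C (r, c) hcol0 best hloop.1 hloop.2 p hcls
    have hcolp := pvCls_colored ⟨hseedB, hseedC⟩ hcls
    refine ⟨?_, by simpa using hcolp.2⟩
    by_contra hnk
    have hnone : best.get? p = none :=
      (PySem.Dict.get?_eq_none_iff_not_mem_keys _ _).mpr hnk
    rw [hnone] at hget
    cases hget

-- ---------- Layer 5: the outer scans agree ----------

def pvCtxOf (grid : List (List Int)) (rows cols hops color : Int) : PvCtx :=
  ⟨grid, rows, cols, hops, color⟩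

-- relation between the ghost scan state and B's scan state: same seen membership,
-- equal box dicts, and the seen set is closed under same-color components
def PvORel (grid : List (List Int)) (rows cols hops : Int)
    (sa sb : PySem.Set (Int × Int) × PySem.Dict Int (List (Int × Int × Int × Int))) : Prop :=
  (∀ p, p ∈ sa.1 ↔ p ∈ sb.1) ∧ sa.2 = sb.2 ∧
  (∀ p, p ∈ sb.1 → pvCell grid p.1 p.2 ≠ 0 ∧
    (∀ x, (pvCtxOf grid rows cols hops (pvCell grid p.1 p.2)).cls p x → x ∈ sb.1))

set_option maxHeartbeats 1000000 in
theorem pvGhost_eq_alt (grid : List (List Int)) (blank_hops : Int) :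
    pvGhostMain grid blank_hops = get_largest_bounding_box_alt grid blank_hops := by
  cases grid with
  | nil => rfl
  | cons g0 gs =>
    by_cases hg0 : g0 = []
    · simp [pvGhostMain, get_largest_bounding_box_alt, hg0]
    · simp only [pvGhostMain, get_largest_bounding_box_alt, if_neg hg0]
      set grid := g0 :: gs with hgrid
      set rows : Int := PySem.List.len grid with hrows
      set cols : Int := PySem.List.len (PySem.List.pyGetD grid 0 []) with hcols
      set hops : Int := max 0 blank_hops with hhops
      have hh : 0 ≤ hops := le_max_left 0 blank_hops
      have hbody : ∀ r ∈ PySem.List.pyRange 0 rows 1, ∀ sa sb, PvORel grid rows cols hops sa sb →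
          PvORel grid rows cols hops
            ((PySem.List.pyRange 0 cols 1).foldl (fun st c =>
              let color := pvCell grid r c
              if color = 0 ∨ PySem.Set.contains st.1 (r, c) = true then st
              else
                let fuel := rows.toNat * cols.toNat * (hops.toNat + 2) + 2
                let res := pvBfsG grid rows cols hops color fuel [(r, c, 0)]
                    (PySem.Set.add st.1 (r, c)) PySem.Dict.empty r c r c
                (res.1, st.2.modify color [] (fun l => l ++ [res.2]))) sa)
            ((PySem.List.pyRange 0 cols 1).foldl (fun st c =>
              let color := pvCell grid r c
              if color = 0 ∨ PySem.Set.contains st.1 (r, c) = true then st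
              else
                let fuel := (hops.toNat + 2) * (rows.toNat * cols.toNat) + 2
                let best := pvDpLoop grid rows cols hops color fuel
                    (PySem.Dict.empty.insert (r, c) 0)
                let comp := best.keys.filter (fun p => pvCell grid p.1 p.2 == color)
                let rs := comp.map (fun p => p.1)
                let cs := comp.map (fun p => p.2)
                let box := ((PySem.List.min? rs (fun x => x)).getD 0,
                            (PySem.List.min? cs (fun x => x)).getD 0,
                            (PySem.List.max? rs (fun x => x)).getD 0,
                            (PySem.List.max? cs (fun x => x)).getD 0)
                (PySem.Set.update st.1 comp, st.2.modify color [] (fun l => l ++ [box]))) sb) := by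
        intro r hr sa sb hrel
        have hrb := PySem.List.mem_pyRange_one.mp hr
        refine pvFoldRel _ _ _ _ ?_ sa sb hrel
        intro c hc st st' hrel'
        have hcb := PySem.List.mem_pyRange_one.mp hc
        obtain ⟨hab, hdict, hinv⟩ := hrel'
        simp only
        have hcont : PySem.Set.contains st.1 (r, c) = PySem.Set.contains st'.1 (r, c) := by
          rw [Bool.eq_iff_iff, PySem.Set.contains_iff, PySem.Set.contains_iff]
          exact hab (r, c)
        by_cases hguard : pvCell grid r c = 0 ∨ PySem.Set.contains st'.1 (r, c) = true
        · rw [if_pos (by rw [hcont]; exact hguard), if_pos hguard]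
          exact ⟨hab, hdict, hinv⟩
        · rw [if_neg (by rw [hcont]; exact hguard), if_neg hguard]
          have hcol0 : pvCell grid r c ≠ 0 := fun h => hguard (Or.inl h)
          have hseednot' : (r, c) ∉ st'.1 := by
            intro h
            exact hguard (Or.inr ((PySem.Set.contains_iff _ _).mpr h))
          have hseedB : (pvCtxOf grid rows cols hops (pvCell grid r c)).inB (r, c) :=
            ⟨hrb.1, hrb.2, hcb.1, hcb.2⟩
          have hseedC : (pvCtxOf grid rows cols hops (pvCell grid r c)).cell (r, c)
              = (pvCtxOf grid rows cols hops (pvCell grid r c)).color := rfl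
          have hdisj' : ∀ x, (pvCtxOf grid rows cols hops (pvCell grid r c)).cls (r, c) x →
              x ∉ st'.1 := by
            intro x hx hxin
            have h3 := hinv x hxin
            have hcolx : pvCell grid x.1 x.2 = pvCell grid r c :=
              (pvCls_colored ⟨hseedB, hseedC⟩ hx).2
            have hctxeq : pvCtxOf grid rows cols hops (pvCell grid x.1 x.2)
                = pvCtxOf grid rows cols hops (pvCell grid r c) := by
              rw [hcolx]
            have hback : (pvCtxOf grid rows cols hops (pvCell grid x.1 x.2)).cls x (r, c) := by
              rw [hctxeq]
              exact pvCls_symm hx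
            exact hseednot' (h3.2 (r, c) hback)
          have hdisj : ∀ x, (pvCtxOf grid rows cols hops (pvCell grid r c)).cls (r, c) x →
              x ∉ st.1 := fun x hx h => hdisj' x hx ((hab _).mp h)
          have hchar := pvBfsG_char (pvCtxOf grid rows cols hops (pvCell grid r c)) r c st.1
            hh hcol0 hseedB hseedC hdisj
          have hcompI := pvDp_char (pvCtxOf grid rows cols hops (pvCell grid r c)) r c
            hh hcol0 hseedB hseedC
          dsimp only [pvCtxOf] at hchar hcompI
          have hx0 : (r, c) ∈ ((pvDpLoop grid rows cols hops (pvCell grid r c)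
              ((hops.toNat + 2) * (rows.toNat * cols.toNat) + 2)
              (PySem.Dict.empty.insert (r, c) 0)).keys.filter
                (fun q => pvCell grid q.1 q.2 == pvCell grid r c)) :=
            (hcompI (r, c)).mpr Relation.ReflTransGen.refl
          have hbox := pvBoxOfComp _ _ hcompI (r, c) hx0
          have hboxeq := pvIsExt_unique hchar.2 hbox
          refine ⟨?_, ?_, ?_⟩
          · intro p
            dsimp only
            rw [hchar.1 p, PySem.Set.mem_update, hcompI p]
            exact or_congr_left (hab p)
          · dsimp only
            rw [hdict, hboxeq]
          · intro p hp
            dsimp only at hp ⊢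
            rcases (PySem.Set.mem_update _ _ _).mp hp with hold | hnew
            · obtain ⟨h1, h2⟩ := hinv p hold
              exact ⟨h1, fun x hx => (PySem.Set.mem_update _ _ _).mpr (Or.inl (h2 x hx))⟩
            · have hclsp := (hcompI p).mp hnew
              have hcolp : pvCell grid p.1 p.2 = pvCell grid r c :=
                (pvCls_colored ⟨hseedB, hseedC⟩ hclsp).2
              have hctxeq : pvCtxOf grid rows cols hops (pvCell grid p.1 p.2)
                  = pvCtxOf grid rows cols hops (pvCell grid r c) := by
                rw [hcolp]
              refine ⟨by rw [hcolp]; exact hcol0, ?_⟩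
              intro x hx
              rw [hctxeq] at hx
              have : (pvCtxOf grid rows cols hops (pvCell grid r c)).cls (r, c) x :=
                pvCls_trans hclsp hx
              exact (PySem.Set.mem_update _ _ _).mpr (Or.inr ((hcompI x).mpr this))
      have hinit : PvORel grid rows cols hops
          (((PySem.Set.empty : PySem.Set (Int × Int)),
            (PySem.Dict.empty : PySem.Dict Int (List (Int × Int × Int × Int)))))
          (((PySem.Set.empty : PySem.Set (Int × Int)),
            (PySem.Dict.empty : PySem.Dict Int (List (Int × Int × Int × Int))))) :=
        ⟨fun p => Iff.rfl, rfl, fun p hp => absurd hp (by cases hp)⟩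
      have H := pvFoldRel (PvORel grid rows cols hops) _ _ (PySem.List.pyRange 0 rows 1)
        hbody _ _ hinit
      obtain ⟨hab, hdict, hinv⟩ := H
      rw [hdict]

-- ===== VERDICT (by name: the statement is the Claim_ definition above) =====
theorem get_largest_bounding_box_spec : Claim_equal_get_largest_bounding_box := by
  intro grid blank_hops _hdom _hpre
  unfold Spec_get_largest_bounding_box
  rw [pvA_eq_ghost, pvGhost_eq_alt]
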